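-- pv_equiv track=rewrite | github.com/FFedericoFantini/daas-course-project | apps/airspace_core/rules.py | _build_conflict_components
-- ===== SOURCE A (Python) =====
-- from collections import defaultdict
--
-- def _build_conflict_components(conflict_pairs: list[tuple[str, str]]) -> list[list[str]]:
--     graph: dict[str, set[str]] = defaultdict(set)
--     for first_id, second_id in conflict_pairs:
--         graph[first_id].add(second_id)
--         graph[second_id].add(first_id)
--
--     components = []
--     visited: set[str] = set()
--     for drone_id in graph:
--         if drone_id in visited:
--             continue
--         stack = [drone_id]
--         component = []
--         visited.add(drone_id)
--         while stack:
--             current = stack.pop()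
--             component.append(current)
--             for neighbor in graph[current]:
--                 if neighbor not in visited:
--                     visited.add(neighbor)
--                     stack.append(neighbor)
--         components.append(sorted(component))
--     return components
-- ===== SOURCE B (Python) =====
-- def _build_conflict_components(conflict_pairs):
--     # Incremental component merging: no adjacency graph, no DFS.
--     comps: list[list[str]] = []
--
--     def locate(x):
--         for i, c in enumerate(comps):
--             if x in c:
--                 return i
--         return None
--
--     for a, b in conflict_pairs:
--         ia = locate(a)
--         if ia is None:
--             comps.append([a])
--             ia = len(comps) - 1
--         ib = locate(b)
--         if ib is None:
--             comps[ia].append(b)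
--         elif ib != ia:
--             lo, hi = min(ia, ib), max(ia, ib)
--             comps[lo].extend(comps[hi])
--             del comps[hi]
--     return [sorted(c) for c in comps]
-- ===== Notes on version B (the rewrite author's own statement) =====
-- stated objective: alternative
-- what changed: B replaces the adjacency-dict + stack-DFS traversal by incremental component merging: it folds once over the pairs keeping a list of disjoint component lists, creating/merging components as pairs arrive, then sorts each component.
import Mathlib
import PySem

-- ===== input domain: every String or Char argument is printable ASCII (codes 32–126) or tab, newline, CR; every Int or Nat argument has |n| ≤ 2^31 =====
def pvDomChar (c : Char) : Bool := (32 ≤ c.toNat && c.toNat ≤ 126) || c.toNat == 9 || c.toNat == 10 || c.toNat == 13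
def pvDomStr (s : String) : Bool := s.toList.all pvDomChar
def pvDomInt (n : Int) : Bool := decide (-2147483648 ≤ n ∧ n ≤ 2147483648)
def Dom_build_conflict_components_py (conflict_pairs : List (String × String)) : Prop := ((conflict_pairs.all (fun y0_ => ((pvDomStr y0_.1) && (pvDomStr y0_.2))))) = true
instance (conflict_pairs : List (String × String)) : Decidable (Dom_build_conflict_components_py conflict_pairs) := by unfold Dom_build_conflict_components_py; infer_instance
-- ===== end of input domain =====

-- B replaces A's adjacency-dict + stack-DFS component search by incremental merging of
-- disjoint component lists while folding once over the pairs (alternative algorithm, similar cost).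


-- ===== PORT A =====
-- graph = defaultdict(set); graph[first].add(second); graph[second].add(first)
def bccGraph (conflict_pairs : List (String × String)) : PySem.Dict String (PySem.Set String) :=
  conflict_pairs.foldl
    (fun g p =>
      (g.modify p.1 PySem.Set.empty (fun s => s.add p.2)).modify p.2 PySem.Set.empty (fun s => s.add p.1))
    PySem.Dict.empty

-- the `while stack:` DFS loop; Python pushes/pops at the list's right end, modeled at the
-- head of a Lean list (same LIFO discipline).  The fuel argument only makes the loop total;
-- with the fuel passed below it is proved never to run out.
def bccDfs (g : PySem.Dict String (PySem.Set String)) :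
    Nat → List String → List String → PySem.Set String → List String × PySem.Set String
  | 0, _, comp, visited => (comp, visited)
  | _ + 1, [], comp, visited => (comp, visited)
  | fuel + 1, current :: stack, comp, visited =>
    let sv := (g.getD current PySem.Set.empty).foldl
      (fun (sv : List String × PySem.Set String) n =>
        if sv.2.contains n then sv else (n :: sv.1, sv.2.add n)) (stack, visited)
    bccDfs g fuel sv.1 (comp ++ [current]) sv.2

def build_conflict_components_py (conflict_pairs : List (String × String)) : List (List String) :=
  let graph := bccGraph conflict_pairs
  (graph.keys.foldl
    (fun (st : List (List String) × PySem.Set String) drone_id =>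
      if st.2.contains drone_id then st
      else
        let r := bccDfs graph (graph.size + 1) [drone_id] [] (st.2.add drone_id)
        (st.1 ++ [PySem.List.sorted r.1 (fun x => x) false], r.2))
    ([], PySem.Set.empty)).1

-- ===== PORT B =====
-- locate(x): index of the first component containing x, else None
def bccLocate : List (List String) → String → Option Nat
  | [], _ => none
  | c :: rest, x => if c.contains x then some 0 else (bccLocate rest x).map (· + 1)

def bccStep (comps : List (List String)) (p : String × String) : List (List String) :=
  let (comps, ia) :=
    match bccLocate comps p.1 with
    | some i => (comps, i)
    | none => (comps ++ [[p.1]], comps.length)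
  match bccLocate comps p.2 with
  | none => comps.set ia ((comps.getD ia []) ++ [p.2])
  | some ib =>
    if ib = ia then comps
    else
      let lo := min ia ib
      let hi := max ia ib
      (comps.set lo ((comps.getD lo []) ++ (comps.getD hi []))).eraseIdx hi

def build_conflict_components_py_alt (conflict_pairs : List (String × String)) : List (List String) :=
  (conflict_pairs.foldl bccStep []).map (fun c => PySem.List.sorted c (fun x => x) false)

-- ===== PRECONDITION & SPEC =====
def Spec_build_conflict_components_py (conflict_pairs : List (String × String)) (out : List (List String)) : Prop := out = build_conflict_components_py_alt conflict_pairs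
instance (conflict_pairs : List (String × String)) (out : List (List String)) : Decidable (Spec_build_conflict_components_py conflict_pairs out) := by unfold Spec_build_conflict_components_py; infer_instance

-- ===== CLAIM (what is proved, stated in full; the proofs are below) =====
def Claim_equal_build_conflict_components_py : Prop := ∀ (conflict_pairs : List (String × String)), Dom_build_conflict_components_py conflict_pairs → Spec_build_conflict_components_py conflict_pairs (build_conflict_components_py conflict_pairs)

-- ===== LEMMAS AND PROOFS =====
-- Proof strategy: both ports are shown to produce the canonical component list of the
-- conflict graph (pvIsCanon), which is unique; hence they are equal.
def pvStep (cps : List (String × String)) (x y : String) : Prop :=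
  (x, y) ∈ cps ∨ (y, x) ∈ cps

def pvR (cps : List (String × String)) : String → String → Prop :=
  Relation.ReflTransGen (pvStep cps)

def pvNodes (cps : List (String × String)) : List String :=
  cps.foldl (fun ns p => PySem.Set.add (PySem.Set.add ns p.1) p.2) []

theorem pvStep_symm {cps : List (String × String)} {x y : String} (h : pvStep cps x y) :
    pvStep cps y x := h.elim Or.inr Or.inl

theorem pvR_symm {cps : List (String × String)} {x y : String} (h : pvR cps x y) :
    pvR cps y x :=
  Relation.ReflTransGen.symmetric (fun _ _ hs => pvStep_symm hs) h

theorem pvNodes_acc_mem (cps : List (String × String)) :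
    ∀ (ns : List String) (x : String),
      x ∈ cps.foldl (fun ns p => PySem.Set.add (PySem.Set.add ns p.1) p.2) ns ↔
        x ∈ ns ∨ ∃ p ∈ cps, x = p.1 ∨ x = p.2 := by
  induction cps with
  | nil => simp
  | cons p rest ih =>
    intro ns x
    simp only [List.foldl_cons, ih, PySem.Set.mem_add, List.mem_cons]
    constructor
    · rintro (((h | h) | h) | ⟨q, hq, h⟩)
      · exact Or.inl h
      · exact Or.inr ⟨p, Or.inl rfl, Or.inl h⟩
      · exact Or.inr ⟨p, Or.inl rfl, Or.inr h⟩
      · exact Or.inr ⟨q, Or.inr hq, h⟩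
    · rintro (h | ⟨q, (rfl | hq), h⟩)
      · exact Or.inl (Or.inl (Or.inl h))
      · rcases h with h | h
        · exact Or.inl (Or.inl (Or.inr h))
        · exact Or.inl (Or.inr h)
      · exact Or.inr ⟨q, hq, h⟩

theorem mem_pvNodes {cps : List (String × String)} {x : String} :
    x ∈ pvNodes cps ↔ ∃ p ∈ cps, x = p.1 ∨ x = p.2 := by
  simpa using pvNodes_acc_mem cps [] x

theorem pvNodes_acc_nodup (cps : List (String × String)) :
    ∀ ns : List String, ns.Nodup →
      (cps.foldl (fun ns p => PySem.Set.add (PySem.Set.add ns p.1) p.2) ns).Nodup := by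
  induction cps with
  | nil => intro ns h; simpa using h
  | cons p rest ih =>
    intro ns h
    exact ih _ (PySem.Set.nodup_add _ _ (PySem.Set.nodup_add _ _ h))

theorem pvNodes_nodup (cps : List (String × String)) : (pvNodes cps).Nodup :=
  pvNodes_acc_nodup cps [] (by simp)

theorem pvStep_mem {cps : List (String × String)} {x y : String} (h : pvStep cps x y) :
    x ∈ pvNodes cps ∧ y ∈ pvNodes cps := by
  rcases h with h | h
  · exact ⟨mem_pvNodes.2 ⟨(x, y), h, Or.inl rfl⟩, mem_pvNodes.2 ⟨(x, y), h, Or.inr rfl⟩⟩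
  · exact ⟨mem_pvNodes.2 ⟨(y, x), h, Or.inr rfl⟩, mem_pvNodes.2 ⟨(y, x), h, Or.inl rfl⟩⟩

theorem pvR_of_not_mem {cps : List (String × String)} {x y : String}
    (hx : x ∉ pvNodes cps) (h : pvR cps x y) : y = x := by
  induction h with
  | refl => rfl
  | tail _ hs ih => exact absurd ((ih ▸ hs : pvStep cps x _)) (fun hc => hx (pvStep_mem hc).1)

theorem pvR_mem_right {cps : List (String × String)} {x y : String}
    (h : pvR cps x y) (hne : y ≠ x) : y ∈ pvNodes cps := by
  induction h with
  | refl => exact absurd rfl hne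
  | tail _ hs _ => exact (pvStep_mem hs).2

-- ===== canonical-output characterisation =====

def pvMinRep (ns : List String) (R : String → String → Prop) (r : String) : Prop :=
  r ∈ ns ∧ ∀ y ∈ ns, R r y → ns.idxOf r ≤ ns.idxOf y

def pvIsCanon (ns : List String) (R : String → String → Prop) (out : List (List String)) : Prop :=
  ∃ reps : List String,
    out.length = reps.length ∧
    (∀ r, r ∈ reps ↔ pvMinRep ns R r) ∧
    reps.Pairwise (fun a b => ns.idxOf a < ns.idxOf b) ∧
    ∀ i (h1 : i < out.length) (h2 : i < reps.length),
      (out[i]).Pairwise (· < ·) ∧ ∀ x, x ∈ out[i] ↔ (x ∈ ns ∧ R reps[i] x)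

theorem strictSorted_eq_of_mem_iff :
    ∀ (l1 l2 : List String), l1.Pairwise (· < ·) → l2.Pairwise (· < ·) →
      (∀ x, x ∈ l1 ↔ x ∈ l2) → l1 = l2 := by
  intro l1
  induction l1 with
  | nil =>
    intro l2 _ _ hm
    cases l2 with
    | nil => rfl
    | cons b t => exact absurd ((hm b).2 (by simp)) (by simp)
  | cons a t ih =>
    intro l2 h1 h2 hm
    cases l2 with
    | nil => exact absurd ((hm a).1 (by simp)) (by simp)
    | cons b t2 =>
      have hab : a = b := by
        rcases List.mem_cons.1 ((hm a).1 (by simp)) with h | h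
        · exact h
        · rcases List.mem_cons.1 ((hm b).2 (by simp)) with h' | h'
          · exact h'.symm
          · exact absurd (lt_trans ((List.pairwise_cons.1 h1).1 b h')
              ((List.pairwise_cons.1 h2).1 a h)) (lt_irrefl _)
      subst hab
      have : t = t2 := by
        refine ih t2 (List.pairwise_cons.1 h1).2 (List.pairwise_cons.1 h2).2 (fun x => ⟨?_, ?_⟩)
        · intro hx
          rcases List.mem_cons.1 ((hm x).1 (List.mem_cons_of_mem _ hx)) with h | h
          · exact absurd (h ▸ (List.pairwise_cons.1 h1).1 x hx) (lt_irrefl _)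
          · exact h
        · intro hx
          rcases List.mem_cons.1 ((hm x).2 (List.mem_cons_of_mem _ hx)) with h | h
          · exact absurd (h ▸ (List.pairwise_cons.1 h2).1 x hx) (lt_irrefl _)
          · exact h
      rw [this]

theorem reps_det (ns : List String) :
    ∀ (r1 : List String) (P : String → Prop) (r2 : List String),
      (∀ r, r ∈ r1 ↔ P r) → (∀ r, r ∈ r2 ↔ P r) →
      r1.Pairwise (fun a b => ns.idxOf a < ns.idxOf b) →
      r2.Pairwise (fun a b => ns.idxOf a < ns.idxOf b) → r1 = r2 := by
  intro r1
  induction r1 with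
  | nil =>
    intro P r2 h1 h2 _ _
    cases r2 with
    | nil => rfl
    | cons b t => exact absurd ((h1 b).2 ((h2 b).1 (by simp))) (by simp)
  | cons a t ih =>
    intro P r2 h1 h2 hp1 hp2
    cases r2 with
    | nil => exact absurd ((h2 a).2 ((h1 a).1 (by simp))) (by simp)
    | cons b t2 =>
      have hab : a = b := by
        rcases List.mem_cons.1 ((h2 a).2 ((h1 a).1 (by simp))) with h | h
        · exact h
        · rcases List.mem_cons.1 ((h1 b).2 ((h2 b).1 (by simp))) with h' | h'
          · exact h'.symm
          · exact absurd (lt_trans ((List.pairwise_cons.1 hp1).1 b h')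
              ((List.pairwise_cons.1 hp2).1 a h)) (lt_irrefl _)
      subst hab
      have : t = t2 := by
        refine ih (fun r => P r ∧ r ≠ a) t2 (fun x => ⟨?_, ?_⟩) (fun x => ⟨?_, ?_⟩)
          (List.pairwise_cons.1 hp1).2 (List.pairwise_cons.1 hp2).2
        · intro hx
          refine ⟨(h1 x).1 (List.mem_cons_of_mem _ hx), fun hc => ?_⟩
          exact absurd (hc ▸ (List.pairwise_cons.1 hp1).1 x hx) (lt_irrefl _)
        · rintro ⟨hP, hne⟩
          rcases List.mem_cons.1 ((h1 x).2 hP) with h | h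
          · exact absurd h hne
          · exact h
        · intro hx
          refine ⟨(h2 x).1 (List.mem_cons_of_mem _ hx), fun hc => ?_⟩
          exact absurd (hc ▸ (List.pairwise_cons.1 hp2).1 x hx) (lt_irrefl _)
        · rintro ⟨hP, hne⟩
          rcases List.mem_cons.1 ((h2 x).2 hP) with h | h
          · exact absurd h hne
          · exact h
      rw [this]

theorem pvIsCanon_unique {ns : List String} {R : String → String → Prop}
    {o1 o2 : List (List String)} (h1 : pvIsCanon ns R o1) (h2 : pvIsCanon ns R o2) :
    o1 = o2 := by
  obtain ⟨r1, hl1, hm1, hp1, hc1⟩ := h1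
  obtain ⟨r2, hl2, hm2, hp2, hc2⟩ := h2
  have hr : r1 = r2 := reps_det ns r1 (pvMinRep ns R) r2 hm1 hm2 hp1 hp2
  subst hr
  have hlen : o1.length = o2.length := by omega
  refine List.ext_getElem hlen (fun i hi1 hi2 => ?_)
  have hir : i < r1.length := by omega
  obtain ⟨hs1, hmem1⟩ := hc1 i hi1 hir
  obtain ⟨hs2, hmem2⟩ := hc2 i hi2 hir
  exact strictSorted_eq_of_mem_iff _ _ hs1 hs2 (fun x => (hmem1 x).trans (hmem2 x).symm)

-- ===== idx helpers for a nodup split ns = pre ++ suf =====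
theorem idx_append_left {pre suf : List String} {y : String} (hy : y ∈ pre) :
    (pre ++ suf).idxOf y < pre.length := by
  rw [List.idxOf_append_of_mem hy]
  exact List.idxOf_lt_length_of_mem hy

theorem mem_pre_of_idx_lt {pre suf : List String} {y : String}
    (hmem : y ∈ pre ++ suf) (h : (pre ++ suf).idxOf y < pre.length) : y ∈ pre := by
  by_contra hc
  rw [List.idxOf_append_of_notMem hc] at h
  omega

theorem idx_head_suf {pre rest : List String} {x : String} (hx : x ∉ pre) :
    (pre ++ x :: rest).idxOf x = pre.length := by
  rw [List.idxOf_append_of_notMem hx]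
  simp

-- ===== A-side graph lemmas =====
theorem keys_insert_eq_add {d : PySem.Dict String (PySem.Set String)} {k : String}
    {v : PySem.Set String} : (d.insert k v).keys = PySem.Set.add d.keys k := by
  simp only [PySem.Dict.insert, PySem.Dict.keys, PySem.Set.add, PySem.Set.contains]
  have hc : d.keys.contains k = (d.contains k) := by
    simp [PySem.Dict.contains_eq_decide_mem_keys, List.contains_iff_mem, PySem.Dict.keys]
  rw [PySem.Dict.keys] at hc
  rw [hc]
  split
  · simp only [List.map_map]
    congr 1
    funext p
    by_cases hp : p.1 = k <;> simp [hp]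
  · simp

theorem keys_modify_eq_add {d : PySem.Dict String (PySem.Set String)} {k : String}
    {d0 : PySem.Set String} {f : PySem.Set String → PySem.Set String} :
    (d.modify k d0 f).keys = PySem.Set.add d.keys k := by
  rw [PySem.Dict.keys_modify, keys_insert_eq_add]

theorem bccGraph_acc_keys (cps : List (String × String)) :
    ∀ g : PySem.Dict String (PySem.Set String),
      (cps.foldl (fun g p =>
        (g.modify p.1 PySem.Set.empty (fun s => s.add p.2)).modify p.2 PySem.Set.empty
          (fun s => s.add p.1)) g).keys =
      cps.foldl (fun ns p => PySem.Set.add (PySem.Set.add ns p.1) p.2) g.keys := by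
  induction cps with
  | nil => intro g; rfl
  | cons p rest ih =>
    intro g
    simp only [List.foldl_cons, ih, keys_modify_eq_add]

theorem bccGraph_keys (cps : List (String × String)) :
    (bccGraph cps).keys = pvNodes cps := by
  have h := bccGraph_acc_keys cps PySem.Dict.empty
  simpa [bccGraph, pvNodes, PySem.Dict.empty, PySem.Dict.keys] using h

theorem mem_getD_modify_add (d : PySem.Dict String (PySem.Set String)) (k v x y : String) :
    y ∈ (d.modify k PySem.Set.empty (fun s => s.add v)).getD x PySem.Set.empty ↔
      y ∈ d.getD x PySem.Set.empty ∨ (x = k ∧ y = v) := by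
  rw [PySem.Dict.getD_modify]
  by_cases hx : x = k
  · subst hx; simp [PySem.Set.mem_add]
  · simp [hx]

theorem bccGraph_acc_adj (cps : List (String × String)) :
    ∀ (g : PySem.Dict String (PySem.Set String)) (x y : String),
      y ∈ (cps.foldl (fun g p =>
        (g.modify p.1 PySem.Set.empty (fun s => s.add p.2)).modify p.2 PySem.Set.empty
          (fun s => s.add p.1)) g).getD x PySem.Set.empty ↔
      y ∈ g.getD x PySem.Set.empty ∨ pvStep cps x y := by
  induction cps with
  | nil => intro g x y; simp [pvStep]
  | cons p rest ih =>
    intro g x y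
    simp only [List.foldl_cons, ih]
    have hstep : pvStep (p :: rest) x y ↔ ((x = p.1 ∧ y = p.2) ∨ (x = p.2 ∧ y = p.1)) ∨ pvStep rest x y := by
      simp only [pvStep, List.mem_cons, Prod.ext_iff]
      tauto
    rw [hstep]
    have hg : y ∈ ((g.modify p.1 PySem.Set.empty (fun s => s.add p.2)).modify p.2 PySem.Set.empty
        (fun s => s.add p.1)).getD x PySem.Set.empty ↔
        y ∈ g.getD x PySem.Set.empty ∨ ((x = p.1 ∧ y = p.2) ∨ (x = p.2 ∧ y = p.1)) := by
      rw [mem_getD_modify_add, mem_getD_modify_add]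
      tauto
    rw [hg]
    tauto

theorem bccGraph_adj (cps : List (String × String)) (x y : String) :
    y ∈ (bccGraph cps).getD x PySem.Set.empty ↔ pvStep cps x y := by
  have h := bccGraph_acc_adj cps PySem.Dict.empty x y
  simpa [bccGraph, PySem.Dict.empty, PySem.Dict.getD, PySem.Dict.get?, PySem.Set.empty] using h

theorem mem_of_closed {cps : List (String × String)} {vis : List String}
    (hcl : ∀ y ∈ vis, ∀ z, pvStep cps y z → z ∈ vis) {y x : String}
    (hy : y ∈ vis) (h : pvR cps y x) : x ∈ vis := by
  induction h with
  | refl => exact hy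
  | tail _ hs ih => exact hcl _ ih _ hs

theorem set_add_of_not_mem {s : PySem.Set String} {x : String} (h : x ∉ s) :
    PySem.Set.add s x = s ++ [x] := by
  simp only [PySem.Set.add]
  rw [if_neg]
  simp only [PySem.Set.contains]
  intro hc
  exact h (by simpa using List.mem_of_elem_eq_true hc)

theorem set_contains_false_of_not_mem {s : PySem.Set String} {x : String} (h : x ∉ s) :
    PySem.Set.contains s x = false := by
  cases hc : PySem.Set.contains s x
  · rfl
  · exact absurd ((PySem.Set.contains_iff s x).1 hc) h

theorem push_fold (nbrs : List String) :
    ∀ (stack : List String) (visited : PySem.Set String),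
      ∃ π : List String,
        nbrs.foldl (fun (sv : List String × PySem.Set String) n =>
          if sv.2.contains n then sv else (n :: sv.1, sv.2.add n)) (stack, visited) =
          (π.reverse ++ stack, visited ++ π) ∧
        π.Nodup ∧ (∀ p ∈ π, p ∈ nbrs ∧ p ∉ visited) ∧ (∀ n ∈ nbrs, n ∈ visited ∨ n ∈ π) := by
  induction nbrs with
  | nil => intro stack visited; exact ⟨[], by simp⟩
  | cons n rest ih =>
    intro stack visited
    by_cases hn : n ∈ visited
    · obtain ⟨π, heq, hnd, hp, hcov⟩ := ih stack visited
      refine ⟨π, ?_, hnd, ?_, ?_⟩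
      · rw [List.foldl_cons, if_pos ((PySem.Set.contains_iff visited n).2 hn)]
        exact heq
      · exact fun p hp' => ⟨List.mem_cons_of_mem _ (hp p hp').1, (hp p hp').2⟩
      · intro m hm
        rcases List.mem_cons.1 hm with rfl | hm
        · exact Or.inl hn
        · exact hcov m hm
    · obtain ⟨π, heq, hnd, hp, hcov⟩ := ih (n :: stack) (visited ++ [n])
      refine ⟨n :: π, ?_, ?_, ?_, ?_⟩
      · rw [List.foldl_cons]
        rw [if_neg (by rw [set_contains_false_of_not_mem hn]; exact Bool.false_ne_true)]
        rw [set_add_of_not_mem hn, heq]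
        simp
      · refine List.nodup_cons.2 ⟨fun hc => ?_, hnd⟩
        exact (hp n hc).2 (by simp)
      · intro p hp'
        rcases List.mem_cons.1 hp' with rfl | hp'
        · exact ⟨by simp, hn⟩
        · obtain ⟨h1, h2⟩ := hp p hp'
          exact ⟨List.mem_cons_of_mem _ h1, fun hc => h2 (by simp [hc])⟩
      · intro m hm
        rcases List.mem_cons.1 hm with rfl | hm
        · exact Or.inr (by simp)
        · rcases hcov m hm with h | h
          · rcases List.mem_append.1 h with h | h
            · exact Or.inl h
            · exact Or.inr (by simpa using Or.inl (by simpa using h))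
          · exact Or.inr (List.mem_cons_of_mem _ h)

theorem length_filter_ne {l : List String} (h : l.Nodup) {x : String} (hx : x ∈ l) :
    (l.filter (fun k => k != x)).length + 1 = l.length := by
  induction l with
  | nil => cases hx
  | cons a t ih =>
    rcases List.mem_cons.1 hx with rfl | hxt
    · have hnx : x ∉ t := (List.nodup_cons.1 h).1
      have : t.filter (fun k => k != x) = t := by
        apply List.filter_eq_self.2
        intro b hb
        simp only [bne_iff_ne, ne_eq]
        intro hc; exact hnx (hc ▸ hb)
      simp [this]
    · have hax : (a != x) = true := by
        simp only [bne_iff_ne, ne_eq]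
        intro hc; exact (List.nodup_cons.1 h).1 (hc ▸ hxt)
      simp only [List.filter_cons, hax, if_pos]
      simp only [List.length_cons]
      rw [← ih (List.nodup_cons.1 h).2 hxt]

theorem filter_out_one {ns : List String} (hnd : ns.Nodup) (vis : List String) {x : String}
    (hx : x ∈ ns) (hxv : x ∉ vis) :
    (ns.filter (fun k => decide (k ∉ vis ++ [x]))).length + 1 =
      (ns.filter (fun k => decide (k ∉ vis))).length := by
  have h1 : ns.filter (fun k => decide (k ∉ vis ++ [x])) =
      (ns.filter (fun k => decide (k ∉ vis))).filter (fun k => k != x) := by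
    rw [List.filter_filter]
    apply List.filter_congr
    intro a _
    by_cases h1 : a = x <;> by_cases h2 : a ∈ vis <;> simp [h1, h2]
  have hnd2 : (ns.filter (fun k => decide (k ∉ vis))).Nodup := hnd.filter _
  have hxm : x ∈ ns.filter (fun k => decide (k ∉ vis)) := by
    rw [List.mem_filter]; exact ⟨hx, by simpa using hxv⟩
  rw [h1, length_filter_ne hnd2 hxm]

theorem filter_out_many {ns : List String} (hnd : ns.Nodup) :
    ∀ (π : List String) (vis : List String), π.Nodup → (∀ p ∈ π, p ∈ ns ∧ p ∉ vis) →
      (ns.filter (fun k => decide (k ∉ vis ++ π))).length + π.length =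
        (ns.filter (fun k => decide (k ∉ vis))).length := by
  intro π
  induction π with
  | nil => intro vis _ _; simp
  | cons p t ih =>
    intro vis hπnd hπ
    have h1 := filter_out_one hnd vis (hπ p (by simp)).1 (hπ p (by simp)).2
    have h2 := ih (vis ++ [p]) (List.nodup_cons.1 hπnd).2 (fun q hq => ⟨(hπ q (List.mem_cons_of_mem _ hq)).1, by
      simp only [List.mem_append, List.mem_singleton]
      rintro (h | rfl)
      · exact (hπ q (List.mem_cons_of_mem _ hq)).2 h
      · exact (List.nodup_cons.1 hπnd).1 hq⟩)
    have h3 : vis ++ p :: t = (vis ++ [p]) ++ t := by simp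
    rw [h3, List.length_cons]
    omega

theorem dfs_spec (cps : List (String × String)) (g : PySem.Dict String (PySem.Set String))
    (hadj : ∀ x y, y ∈ g.getD x PySem.Set.empty ↔ pvStep cps x y) :
    ∀ (fuel : Nat) (stack comp : List String) (visited : PySem.Set String),
      (∀ s ∈ stack, s ∈ visited) →
      visited.Nodup →
      (∀ v ∈ visited, v ∈ pvNodes cps) →
      (∀ y ∈ visited, y ∈ stack ∨ ∀ z, pvStep cps y z → z ∈ visited) →
      stack.length + ((pvNodes cps).filter (fun k => decide (k ∉ visited))).length ≤ fuel →
      ∃ δ : List String,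
        (bccDfs g fuel stack comp visited).2 = visited ++ δ ∧
        (bccDfs g fuel stack comp visited).1.Perm (comp ++ stack ++ δ) ∧
        (visited ++ δ).Nodup ∧
        (∀ v ∈ δ, v ∈ pvNodes cps) ∧
        (∀ d ∈ δ, ∃ s ∈ stack, pvR cps s d) ∧
        (∀ y ∈ visited ++ δ, ∀ z, pvStep cps y z → z ∈ visited ++ δ) := by
  intro fuel
  induction fuel with
  | zero =>
    intro stack comp visited hsv hnd hvn hexp hfuel
    have hstack : stack = [] := by
      cases stack with
      | nil => rfl
      | cons a t => simp at hfuel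
    subst hstack
    refine ⟨[], by simp [bccDfs], by simp [bccDfs], by simpa using hnd, by simp, by simp, ?_⟩
    intro y hy z hz
    rcases hexp y (by simpa using hy) with h | h
    · cases h
    · simpa using h z hz
  | succ fuel ih =>
    intro stack comp visited hsv hnd hvn hexp hfuel
    cases stack with
    | nil =>
      refine ⟨[], by simp [bccDfs], by simp [bccDfs], by simpa using hnd, by simp, by simp, ?_⟩
      intro y hy z hz
      rcases hexp y (by simpa using hy) with h | h
      · cases h
      · simpa using h z hz
    | cons current rest =>
      obtain ⟨π, heqfold, hπnd, hπmem, hπcov⟩ := push_fold (g.getD current PySem.Set.empty) rest visited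
      have hstep1 : bccDfs g (fuel + 1) (current :: rest) comp visited =
          bccDfs g fuel (π.reverse ++ rest) (comp ++ [current]) (visited ++ π) := by
        show bccDfs g fuel _ _ _ = _
        rw [heqfold]
      have hπdisj : ∀ p ∈ π, p ∉ visited := fun p hp => (hπmem p hp).2
      have hπnodes : ∀ p ∈ π, p ∈ pvNodes cps := by
        intro p hp
        exact (pvStep_mem ((hadj current p).1 (hπmem p hp).1)).2
      have hnd' : (visited ++ π).Nodup := by
        rw [List.nodup_append]
        refine ⟨hnd, hπnd, ?_⟩
        intro a ha b hb he
        exact hπdisj b hb (he ▸ ha)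
      have hsv' : ∀ s ∈ π.reverse ++ rest, s ∈ visited ++ π := by
        intro s hs
        rcases List.mem_append.1 hs with hs | hs
        · exact List.mem_append.2 (Or.inr (List.mem_reverse.1 hs))
        · exact List.mem_append.2 (Or.inl (hsv s (List.mem_cons_of_mem _ hs)))
      have hvn' : ∀ v ∈ visited ++ π, v ∈ pvNodes cps := by
        intro v hv
        rcases List.mem_append.1 hv with hv | hv
        · exact hvn v hv
        · exact hπnodes v hv
      have hexpcur : ∀ z, pvStep cps current z → z ∈ visited ++ π := by
        intro z hz
        have : z ∈ g.getD current PySem.Set.empty := (hadj current z).2 hz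
        rcases hπcov z this with h | h
        · exact List.mem_append.2 (Or.inl h)
        · exact List.mem_append.2 (Or.inr h)
      have hexp' : ∀ y ∈ visited ++ π, y ∈ π.reverse ++ rest ∨ ∀ z, pvStep cps y z → z ∈ visited ++ π := by
        intro y hy
        rcases List.mem_append.1 hy with hy | hy
        · rcases hexp y hy with h | h
          · rcases List.mem_cons.1 h with rfl | h
            · exact Or.inr hexpcur
            · exact Or.inl (List.mem_append.2 (Or.inr h))
          · exact Or.inr (fun z hz => List.mem_append.2 (Or.inl (h z hz)))
        · exact Or.inl (List.mem_append.2 (Or.inl (List.mem_reverse.2 hy)))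
      have hcount := filter_out_many (pvNodes_nodup cps) π visited hπnd
        (fun p hp => ⟨hπnodes p hp, hπdisj p hp⟩)
      have hfuel' : (π.reverse ++ rest).length +
          ((pvNodes cps).filter (fun k => decide (k ∉ visited ++ π))).length ≤ fuel := by
        simp only [List.length_append, List.length_reverse]
        simp only [List.length_cons] at hfuel
        omega
      obtain ⟨δ', heq', hperm', hnd'', hδn', hδrel', hcl'⟩ :=
        ih (π.reverse ++ rest) (comp ++ [current]) (visited ++ π) hsv' hnd' hvn' hexp' hfuel'
      refine ⟨π ++ δ', ?_, ?_, ?_, ?_, ?_, ?_⟩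
      · rw [hstep1, heq', List.append_assoc]
      · rw [hstep1]
        refine hperm'.trans ?_
        have e1 : comp ++ [current] ++ (π.reverse ++ rest) ++ δ' =
            comp ++ ([current] ++ ((π.reverse ++ rest) ++ δ')) := by simp [List.append_assoc]
        have e2 : comp ++ current :: rest ++ (π ++ δ') =
            comp ++ ([current] ++ ((rest ++ π) ++ δ')) := by simp
        rw [e1, e2]
        refine List.Perm.append_left comp (List.Perm.append_left [current] ?_)
        refine List.Perm.append_right δ' ?_
        exact ((List.reverse_perm π).append_right rest).trans List.perm_append_comm
      · rw [← List.append_assoc]; exact hnd''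
      · intro v hv
        rcases List.mem_append.1 hv with hv | hv
        · exact hπnodes v hv
        · exact hδn' v hv
      · intro d hd
        rcases List.mem_append.1 hd with hd | hd
        · exact ⟨current, by simp, Relation.ReflTransGen.single ((hadj current d).1 (hπmem d hd).1)⟩
        · obtain ⟨s, hs, hrel⟩ := hδrel' d hd
          rcases List.mem_append.1 hs with hs | hs
          · refine ⟨current, by simp, ?_⟩
            have h1 : pvR cps current s :=
              Relation.ReflTransGen.single ((hadj current s).1 (hπmem s (List.mem_reverse.1 hs)).1)
            exact h1.trans hrel
          · exact ⟨s, List.mem_cons_of_mem _ hs, hrel⟩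
      · rw [← List.append_assoc]; exact hcl'

theorem size_eq_keys_length (g : PySem.Dict String (PySem.Set String)) :
    g.size = g.keys.length := by
  simp [PySem.Dict.size, PySem.Dict.keys]

theorem outer_spec (cps : List (String × String)) :
    ∀ (suf pre : List String), pvNodes cps = pre ++ suf →
    ∀ (components : List (List String)) (visited : PySem.Set String) (reps : List String),
      (∀ x, x ∈ visited ↔ (x ∈ pvNodes cps ∧ ∃ k ∈ pre, pvR cps k x)) →
      visited.Nodup →
      components.length = reps.length →
      (∀ r, r ∈ reps ↔ (r ∈ pre ∧ ∀ y ∈ pvNodes cps, pvR cps r y →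
        (pvNodes cps).idxOf r ≤ (pvNodes cps).idxOf y)) →
      reps.Pairwise (fun a b => (pvNodes cps).idxOf a < (pvNodes cps).idxOf b) →
      (∀ i (h1 : i < components.length) (h2 : i < reps.length),
        components[i].Pairwise (· < ·) ∧
          ∀ x, x ∈ components[i] ↔ (x ∈ pvNodes cps ∧ pvR cps reps[i] x)) →
      pvIsCanon (pvNodes cps) (pvR cps)
        (suf.foldl
          (fun (st : List (List String) × PySem.Set String) drone_id =>
            if st.2.contains drone_id then st
            else
              let r := bccDfs (bccGraph cps) ((bccGraph cps).size + 1) [drone_id] [] (st.2.add drone_id)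
              (st.1 ++ [PySem.List.sorted r.1 (fun x => x) false], r.2))
          (components, visited)).1 := by
  intro suf
  induction suf with
  | nil =>
    intro pre hsplit components visited reps hvis hnd hlen hrep hord hcomp
    refine ⟨reps, hlen, ?_, hord, hcomp⟩
    intro r
    rw [hrep]
    unfold pvMinRep
    have hpre : pre = pvNodes cps := by simpa using hsplit.symm
    rw [hpre]
  | cons d rest ih =>
    intro pre hsplit components visited reps hvis hnd hlen hrep hord hcomp
    have hnsnd : (pvNodes cps).Nodup := pvNodes_nodup cps
    have hdns : d ∈ pvNodes cps := by rw [hsplit]; simp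
    have hdpre : d ∉ pre := by
      intro hc
      rw [hsplit] at hnsnd
      rcases List.nodup_append.1 hnsnd with ⟨_, _, hdisj⟩
      exact hdisj d hc d (by simp) rfl
    have hidxd : (pvNodes cps).idxOf d = pre.length := by rw [hsplit]; exact idx_head_suf hdpre
    have hidxpre : ∀ y ∈ pre, (pvNodes cps).idxOf y < pre.length := by
      intro y hy; rw [hsplit]; exact idx_append_left hy
    have hsplit' : pvNodes cps = (pre ++ [d]) ++ rest := by rw [hsplit]; simp
    rw [List.foldl_cons]
    by_cases hdv : d ∈ visited
    · rw [if_pos ((PySem.Set.contains_iff visited d).2 hdv)]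
      obtain ⟨-, k, hk, hkd⟩ := (hvis d).1 hdv
      refine ih (pre ++ [d]) hsplit' components visited reps ?_ hnd hlen ?_ hord hcomp
      · intro x
        rw [hvis]
        constructor
        · rintro ⟨h1, k0, hk0, hr⟩
          exact ⟨h1, k0, by simp [hk0], hr⟩
        · rintro ⟨h1, k0, hk0, hr⟩
          rcases List.mem_append.1 hk0 with hk0 | hk0
          · exact ⟨h1, k0, hk0, hr⟩
          · simp at hk0
            subst hk0
            exact ⟨h1, k, hk, hkd.trans hr⟩
      · intro r
        rw [hrep]
        constructor
        · rintro ⟨h1, h2⟩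
          exact ⟨List.mem_append.2 (Or.inl h1), h2⟩
        · rintro ⟨h1, h2⟩
          rcases List.mem_append.1 h1 with h1 | h1
          · exact ⟨h1, h2⟩
          · simp at h1
            subst h1
            exfalso
            have := h2 k (by rw [hsplit]; exact List.mem_append.2 (Or.inl hk)) (pvR_symm hkd)
            have hik := hidxpre k hk
            omega
    · rw [if_neg (by rw [set_contains_false_of_not_mem hdv]; exact Bool.false_ne_true)]
      rw [set_add_of_not_mem hdv]
      have hgadj := bccGraph_adj cps
      have hvisns : ∀ v ∈ visited, v ∈ pvNodes cps := fun v hv => ((hvis v).1 hv).1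
      have hclvis : ∀ y ∈ visited, ∀ z, pvStep cps y z → z ∈ visited := by
        intro y hy z hz
        obtain ⟨-, k, hk, hky⟩ := (hvis y).1 hy
        exact (hvis z).2 ⟨(pvStep_mem hz).2, k, hk, hky.tail hz⟩
      obtain ⟨δ, hveq, hcperm, hvnd, hδns, hδrel, hδcl⟩ :=
        dfs_spec cps (bccGraph cps) hgadj ((bccGraph cps).size + 1) [d] [] (visited ++ [d])
          (by intro s hs; simp at hs; simp [hs])
          (by rw [List.nodup_append]
              refine ⟨hnd, by simp, ?_⟩
              intro a ha b hb he
              simp at hb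
              exact hdv (hb ▸ he ▸ ha))
          (by intro v hv
              rcases List.mem_append.1 hv with hv | hv
              · exact hvisns v hv
              · simp at hv; exact hv ▸ hdns)
          (by intro y hy
              rcases List.mem_append.1 hy with hy | hy
              · refine Or.inr (fun z hz => List.mem_append.2 (Or.inl (hclvis y hy z hz)))
              · simp at hy; exact Or.inl (by simp [hy]))
          (by have h1 : ((pvNodes cps).filter (fun k => decide (k ∉ visited ++ [d]))).length ≤
                (pvNodes cps).length := List.length_filter_le _ _
              have h2 : (bccGraph cps).size = (pvNodes cps).length := by
                rw [size_eq_keys_length, bccGraph_keys]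
              simp only [List.length_cons, List.length_nil]
              omega)
      set r := bccDfs (bccGraph cps) ((bccGraph cps).size + 1) [d] [] (visited ++ [d]) with hr
      have hδd : ∀ x ∈ δ, pvR cps d x := by
        intro x hx
        obtain ⟨s, hs, hrel⟩ := hδrel x hx
        simp at hs
        exact hs ▸ hrel
      have hdvis' : d ∈ r.2 := by rw [hveq]; simp
      have hclass : ∀ x, x ∈ r.1 ↔ (x ∈ pvNodes cps ∧ pvR cps d x) := by
        intro x
        have hm : x ∈ r.1 ↔ x = d ∨ x ∈ δ := by
          rw [hcperm.mem_iff]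
          simp
        rw [hm]
        constructor
        · rintro (rfl | hx)
          · exact ⟨hdns, Relation.ReflTransGen.refl⟩
          · exact ⟨hδns x hx, hδd x hx⟩
        · rintro ⟨hxns, hdx⟩
          have hxv : x ∈ r.2 := by
            rw [hveq]
            exact mem_of_closed hδcl (by simp) hdx
          rw [hveq] at hxv
          rcases List.mem_append.1 hxv with hxv | hxv
          · rcases List.mem_append.1 hxv with hxv | hxv
            · exfalso
              obtain ⟨-, k, hk, hkx⟩ := (hvis x).1 hxv
              have : d ∈ visited := (hvis d).2 ⟨hdns, k, hk, hkx.trans (pvR_symm hdx)⟩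
              exact hdv this
            · simp at hxv; exact Or.inl hxv
          · exact Or.inr hxv
      have hcompnd : r.1.Nodup := by
        refine hcperm.symm.nodup ?_
        have h1 : (visited ++ ([d] ++ δ)).Nodup := by
          rw [← List.append_assoc]; exact hvnd
        have h2 := List.Nodup.of_append_right (l₁ := visited) h1
        simpa using h2
      -- apply IH at pre ++ [d]
      refine ih (pre ++ [d]) hsplit' (components ++ [PySem.List.sorted r.1 (fun x => x) false])
        r.2 (reps ++ [d]) ?_ ?_ (by simp [hlen]) ?_ ?_ ?_
      · intro x
        rw [hveq]
        constructor
        · intro hx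
          rcases List.mem_append.1 hx with hx | hx
          · rcases List.mem_append.1 hx with hx | hx
            · obtain ⟨h1, k, hk, hkx⟩ := (hvis x).1 hx
              exact ⟨h1, k, by simp [hk], hkx⟩
            · simp at hx
              exact ⟨hx ▸ hdns, d, by simp, hx ▸ Relation.ReflTransGen.refl⟩
          · exact ⟨hδns x hx, d, by simp, hδd x hx⟩
        · rintro ⟨h1, k, hk, hkx⟩
          rcases List.mem_append.1 hk with hk | hk
          · have : x ∈ visited := (hvis x).2 ⟨h1, k, hk, hkx⟩
            exact List.mem_append.2 (Or.inl (List.mem_append.2 (Or.inl this)))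
          · simp at hk
            have hkx' : pvR cps d x := hk ▸ hkx
            have := mem_of_closed hδcl (x := x) (y := d) (by simp) hkx'
            rw [List.append_assoc] at this ⊢
            exact this
      · rw [hveq]; exact hvnd
      · intro rr
        constructor
        · intro hrr
          rcases List.mem_append.1 hrr with hrr | hrr
          · obtain ⟨h1, h2⟩ := (hrep rr).1 hrr
            exact ⟨List.mem_append.2 (Or.inl h1), h2⟩
          · have hrrd : rr = d := by simpa using hrr
            rw [hrrd]
            refine ⟨by simp, ?_⟩
            intro y hy hdy
            by_contra hc
            push_neg at hc
            have hylt : (pvNodes cps).idxOf y < pre.length := by omega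
            have hypre : y ∈ pre := by
              have hy' : y ∈ pre ++ d :: rest := by rw [← hsplit]; exact hy
              have hidxy : (pre ++ d :: rest).idxOf y < pre.length := by
                rw [← hsplit]; omega
              exact mem_pre_of_idx_lt hy' hidxy
            have : d ∈ visited := (hvis d).2 ⟨hdns, y, hypre, pvR_symm hdy⟩
            exact hdv this
        · rintro ⟨h1, h2⟩
          rcases List.mem_append.1 h1 with h1 | h1
          · exact List.mem_append.2 (Or.inl ((hrep rr).2 ⟨h1, h2⟩))
          · simp at h1
            exact List.mem_append.2 (Or.inr (by simp [h1]))
      · rw [List.pairwise_append]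
        refine ⟨hord, by simp, ?_⟩
        intro a ha b hb
        simp at hb
        subst hb
        have hapre : a ∈ pre := ((hrep a).1 ha).1
        have := hidxpre a hapre
        omega
      · intro i h1 h2
        simp only [List.length_append, List.length_singleton] at h1 h2
        by_cases hi : i < components.length
        · rw [List.getElem_append_left hi, List.getElem_append_left (by omega)]
          exact hcomp i hi (by omega)
        · have hie : i = components.length := by omega
          have hie2 : i = reps.length := by omega
          subst hie
          rw [List.getElem_append_right (by omega), List.getElem_append_right (by omega)]
          simp only [hlen, Nat.sub_self, List.getElem_singleton]
          constructor
          · have hpw := PySem.List.sorted_pairwise r.1 (fun x => x)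
            have hnd2 : (PySem.List.sorted r.1 (fun x => x) false).Nodup :=
              (PySem.List.sorted_perm r.1 (fun x => x) false).symm.nodup hcompnd
            have := hpw.and hnd2
            exact this.imp (fun h => lt_of_le_of_ne h.1 h.2)
          · intro x
            rw [PySem.List.mem_sorted, hclass x]

theorem A_canon (cps : List (String × String)) :
    pvIsCanon (pvNodes cps) (pvR cps) (build_conflict_components_py cps) := by
  have h := outer_spec cps (pvNodes cps) [] (by simp) [] [] []
    (by simp) (by simp) rfl (by simp) (by simp) (by intro i h1 h2; simp at h1)
  simp only [build_conflict_components_py]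
  rw [bccGraph_keys]
  exact h


-- ===== B-side =====
theorem pvR_mono {ps : List (String × String)} {p : String × String} {x y : String}
    (h : pvR ps x y) : pvR (ps ++ [p]) x y := by
  refine Relation.ReflTransGen.mono ?_ h
  intro u v huv
  rcases huv with h | h
  · exact Or.inl (List.mem_append.2 (Or.inl h))
  · exact Or.inr (List.mem_append.2 (Or.inl h))

theorem pvStep_append {ps : List (String × String)} {a b x y : String} :
    pvStep (ps ++ [(a, b)]) x y ↔ pvStep ps x y ∨ (x = a ∧ y = b) ∨ (x = b ∧ y = a) := by
  simp only [pvStep, List.mem_append, List.mem_singleton, Prod.ext_iff]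
  tauto

theorem pvR_append {ps : List (String × String)} {a b x y : String} :
    pvR (ps ++ [(a, b)]) x y ↔
      pvR ps x y ∨ (pvR ps x a ∧ pvR ps b y) ∨ (pvR ps x b ∧ pvR ps a y) := by
  constructor
  · intro h
    induction h with
    | refl => exact Or.inl Relation.ReflTransGen.refl
    | tail hxz hstep ih =>
      rcases pvStep_append.1 hstep with hs | ⟨rfl, rfl⟩ | ⟨rfl, rfl⟩
      · rcases ih with ih | ⟨i1, i2⟩ | ⟨i1, i2⟩
        · exact Or.inl (ih.tail hs)
        · exact Or.inr (Or.inl ⟨i1, i2.tail hs⟩)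
        · exact Or.inr (Or.inr ⟨i1, i2.tail hs⟩)
      · rcases ih with ih | ⟨i1, i2⟩ | ⟨i1, i2⟩
        · exact Or.inr (Or.inl ⟨ih, Relation.ReflTransGen.refl⟩)
        · exact Or.inr (Or.inl ⟨i1, Relation.ReflTransGen.refl⟩)
        · exact Or.inl i1
      · rcases ih with ih | ⟨i1, i2⟩ | ⟨i1, i2⟩
        · exact Or.inr (Or.inr ⟨ih, Relation.ReflTransGen.refl⟩)
        · exact Or.inl i1
        · exact Or.inr (Or.inr ⟨i1, Relation.ReflTransGen.refl⟩)
  · rintro (h | ⟨h1, h2⟩ | ⟨h1, h2⟩)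
    · exact pvR_mono h
    · exact ((pvR_mono h1).tail (Or.inl (by simp))).trans (pvR_mono h2)
    · exact ((pvR_mono h1).tail (Or.inr (by simp))).trans (pvR_mono h2)

theorem pvNodes_append {ps : List (String × String)} {a b : String} :
    pvNodes (ps ++ [(a, b)]) = PySem.Set.add (PySem.Set.add (pvNodes ps) a) b := by
  simp [pvNodes, List.foldl_append]

theorem locate_none_iff {comps : List (List String)} {x : String} :
    bccLocate comps x = none ↔ ∀ c ∈ comps, x ∉ c := by
  induction comps with
  | nil => simp [bccLocate]
  | cons c rest ih =>
    by_cases hx : x ∈ c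
    · simp [bccLocate, (List.contains_iff_mem).2 hx, hx]
    · have hc : c.contains x = false := by
        cases h : c.contains x
        · rfl
        · exact absurd (List.contains_iff_mem.1 h) hx
      simp [bccLocate, hc, hx, ih]

theorem locate_some {comps : List (List String)} {x : String} :
    ∀ {i : Nat}, bccLocate comps x = some i → ∃ h : i < comps.length, x ∈ comps[i] := by
  induction comps with
  | nil => intro i h; simp [bccLocate] at h
  | cons c rest ih =>
    intro i h
    by_cases hx : x ∈ c
    · rw [bccLocate, if_pos ((List.contains_iff_mem).2 hx)] at h
      cases h
      exact ⟨by simp, hx⟩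
    · have hc : c.contains x = false := by
        cases hcc : c.contains x
        · rfl
        · exact absurd (List.contains_iff_mem.1 hcc) hx
      rw [bccLocate, if_neg (by rw [hc]; exact Bool.false_ne_true)] at h
      rw [Option.map_eq_some_iff] at h
      obtain ⟨j, hj, rfl⟩ := h
      obtain ⟨hlt, hx2⟩ := ih hj
      exact ⟨by simpa using hlt, by simpa using hx2⟩

-- list surgery at a known split
theorem set_at_len {α : Type} (u : List α) (c x : α) (t : List α) :
    (u ++ c :: t).set u.length x = u ++ x :: t := by
  induction u with
  | nil => rfl
  | cons a u ih => simpa using ih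

theorem getD_at_len (u : List (List String)) (c : List String) (t : List (List String)) :
    (u ++ c :: t).getD u.length [] = c := by
  induction u with
  | nil => rfl
  | cons a u ih => simpa using ih

theorem erase_at_len {α : Type} (u : List α) (c : α) (t : List α) :
    (u ++ c :: t).eraseIdx u.length = u ++ t := by
  induction u with
  | nil => rfl
  | cons a u ih => simpa using ih

theorem decomp_at {α : Type} (l : List α) (i : Nat) (h : i < l.length) :
    l = l.take i ++ l[i] :: l.drop (i + 1) ∧ (l.take i).length = i := by
  constructor
  · conv_lhs => rw [← List.take_append_drop i l]
    congr 1
    rw [← List.getElem_cons_drop h]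
  · simp [Nat.min_eq_left (Nat.le_of_lt h)]

def pvGood (ns : List String) (R : String → String → Prop) (comps : List (List String)) : Prop :=
  (∀ c ∈ comps, c ≠ []) ∧
  (∀ x, (∃ c ∈ comps, x ∈ c) ↔ x ∈ ns) ∧
  comps.flatten.Nodup ∧
  (∀ c ∈ comps, ∀ x ∈ c, ∀ y, (y ∈ c ↔ (y ∈ ns ∧ R x y))) ∧
  comps.Pairwise (fun c d => ns.idxOf c.headI < ns.idxOf d.headI) ∧
  (∀ c ∈ comps, ∀ y ∈ c, ns.idxOf c.headI ≤ ns.idxOf y)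

theorem idx_inj {ns : List String} {x y : String} (hx : x ∈ ns) (hy : y ∈ ns)
    (h : ns.idxOf x = ns.idxOf y) : x = y := by
  have h1 : ns[ns.idxOf x]'(List.idxOf_lt_length_of_mem hx) = x := List.getElem_idxOf _
  have h2 : ns[ns.idxOf y]'(List.idxOf_lt_length_of_mem hy) = y := List.getElem_idxOf _
  rw [← h1, ← h2]
  simp [h]

theorem headI_mem {c : List String} (h : c ≠ []) : c.headI ∈ c := by
  cases c with
  | nil => exact absurd rfl h
  | cons a t => simp

theorem nodup_of_mem_flatten_nodup {comps : List (List String)} {c : List String}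
    (hnd : comps.flatten.Nodup) (hc : c ∈ comps) : c.Nodup :=
  hnd.sublist (List.sublist_flatten_of_mem hc)

theorem good_canon {ns : List String} {R : String → String → Prop} {comps : List (List String)}
    (hRsym : ∀ x y, R x y → R y x) (hg : pvGood ns R comps) :
    pvIsCanon ns R (comps.map (fun c => PySem.List.sorted c (fun x => x) false)) := by
  obtain ⟨hne, hcov, hnd, hcls, hord, hmin⟩ := hg
  refine ⟨comps.map (fun c => c.headI), by simp, ?_, ?_, ?_⟩
  · intro r
    constructor
    · intro hr
      obtain ⟨c, hc, rfl⟩ := List.mem_map.1 hr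
      have hhm : c.headI ∈ c := headI_mem (hne c hc)
      refine ⟨(hcov c.headI).1 ⟨c, hc, hhm⟩, ?_⟩
      intro y hy hRy
      have : y ∈ c := (hcls c hc c.headI hhm y).2 ⟨hy, hRy⟩
      exact hmin c hc y this
    · rintro ⟨hrns, hrmin⟩
      obtain ⟨c, hc, hrc⟩ := (hcov r).2 hrns
      have hhm : c.headI ∈ c := headI_mem (hne c hc)
      have hRhr : R c.headI r := ((hcls c hc c.headI hhm r).1 hrc).2
      have h1 : ns.idxOf c.headI ≤ ns.idxOf r := hmin c hc r hrc
      have h2 : ns.idxOf r ≤ ns.idxOf c.headI :=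
        hrmin c.headI ((hcov c.headI).1 ⟨c, hc, hhm⟩) (hRsym _ _ hRhr)
      have : r = c.headI := idx_inj hrns ((hcov c.headI).1 ⟨c, hc, hhm⟩) (by omega)
      exact List.mem_map.2 ⟨c, hc, this.symm⟩
  · rw [List.pairwise_map]
    exact hord
  · intro i h1 h2
    simp only [List.length_map] at h1 h2
    simp only [List.getElem_map]
    constructor
    · have hcnd : (comps[i]).Nodup := nodup_of_mem_flatten_nodup hnd (by simp)
      have hpw := PySem.List.sorted_pairwise comps[i] (fun x => x)
      have hnd2 : (PySem.List.sorted comps[i] (fun x => x) false).Nodup :=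
        (PySem.List.sorted_perm comps[i] (fun x => x) false).symm.nodup hcnd
      exact (hpw.and hnd2).imp (fun h => lt_of_le_of_ne h.1 h.2)
    · intro x
      rw [PySem.List.mem_sorted]
      exact hcls comps[i] (by simp) comps[i].headI (headI_mem (hne _ (by simp))) x

theorem good_congr {ns : List String} {R R2 : String → String → Prop}
    {comps : List (List String)} (hiff : ∀ x y, R2 x y ↔ R x y) (hg : pvGood ns R comps) :
    pvGood ns R2 comps := by
  obtain ⟨hne, hcov, hnd, hcls, hord, hmin⟩ := hg
  refine ⟨hne, hcov, hnd, ?_, hord, hmin⟩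
  intro c hc x hx y
  rw [hiff]
  exact hcls c hc x hx y

theorem good_singleton {ns : List String} {R R2 : String → String → Prop}
    {comps : List (List String)} {z : String}
    (hg : pvGood ns R comps) (hz : z ∉ ns)
    (hRdom : ∀ x y, R x y → x ≠ y → (x ∈ ns ∧ y ∈ ns))
    (hR2 : ∀ x y, R2 x y ↔ (R x y ∨ (x = z ∧ y = z))) :
    pvGood (ns ++ [z]) R2 (comps ++ [[z]]) := by
  obtain ⟨hne, hcov, hnd, hcls, hord, hmin⟩ := hg
  have hsub : ∀ c ∈ comps, ∀ x ∈ c, x ∈ ns := fun c hc x hx => (hcov x).1 ⟨c, hc, hx⟩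
  have hidx : ∀ y ∈ ns, (ns ++ [z]).idxOf y = ns.idxOf y :=
    fun y hy => List.idxOf_append_of_mem hy
  have hidxz : (ns ++ [z]).idxOf z = ns.length := idx_head_suf hz
  refine ⟨?_, ?_, ?_, ?_, ?_, ?_⟩
  · intro c hc
    rcases List.mem_append.1 hc with hc | hc
    · exact hne c hc
    · simp at hc; simp [hc]
  · intro x
    constructor
    · rintro ⟨c, hc, hx⟩
      rcases List.mem_append.1 hc with hc | hc
      · exact List.mem_append.2 (Or.inl (hsub c hc x hx))
      · simp at hc
        subst hc
        simp at hx
        simp [hx]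
    · intro hx
      rcases List.mem_append.1 hx with hx | hx
      · obtain ⟨c, hc, hxc⟩ := (hcov x).2 hx
        exact ⟨c, List.mem_append.2 (Or.inl hc), hxc⟩
      · simp at hx
        exact ⟨[z], by simp, by simp [hx]⟩
  · rw [List.flatten_append]
    rw [List.nodup_append]
    refine ⟨hnd, by simp, ?_⟩
    intro x hx b hb he
    simp at hb
    have hxns : x ∈ ns := (hcov x).1 (List.mem_flatten.1 hx |>.elim (fun c hc => ⟨c, hc.1, hc.2⟩))
    exact hz ((he.trans hb) ▸ hxns)
  · intro c hc x hx y
    rcases List.mem_append.1 hc with hc | hc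
    · have hxns : x ∈ ns := hsub c hc x hx
      rw [hcls c hc x hx y]
      constructor
      · rintro ⟨h1, h2⟩
        exact ⟨List.mem_append.2 (Or.inl h1), (hR2 x y).2 (Or.inl h2)⟩
      · rintro ⟨h1, h2⟩
        rcases (hR2 x y).1 h2 with h2 | ⟨rfl, rfl⟩
        · by_cases hyz : y = x
          · exact ⟨hyz ▸ hxns, h2⟩
          · exact ⟨(hRdom x y h2 (fun he => hyz he.symm)).2, h2⟩
        · exact absurd hxns hz
    · simp at hc
      subst hc
      simp at hx
      rw [hx]
      constructor
      · intro hy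
        simp at hy
        rw [hy]
        exact ⟨by simp, (hR2 z z).2 (Or.inr ⟨rfl, rfl⟩)⟩
      · rintro ⟨h1, h2⟩
        rcases (hR2 z y).1 h2 with h2 | ⟨-, rfl⟩
        · by_cases hyz : y = z
          · simp [hyz]
          · exact absurd (hRdom z y h2 (fun he => hyz he.symm)).1 hz
        · simp
  · rw [List.pairwise_append]
    refine ⟨?_, by simp, ?_⟩
    · refine hord.imp_of_mem ?_
      intro c d hc hd h
      have h1 := hidx c.headI (hsub c hc _ (headI_mem (hne c hc)))
      have h2 := hidx d.headI (hsub d hd _ (headI_mem (hne d hd)))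
      omega
    · intro c hc d hd
      simp at hd
      rw [hd, show ([z] : List String).headI = z from rfl]
      have h1 := hidx c.headI (hsub c hc _ (headI_mem (hne c hc)))
      have h2 := List.idxOf_lt_length_of_mem (hsub c hc _ (headI_mem (hne c hc)))
      rw [h1, hidxz]
      omega
  · intro c hc y hy
    rcases List.mem_append.1 hc with hc | hc
    · have h1 := hidx c.headI (hsub c hc _ (headI_mem (hne c hc)))
      have h2 := hidx y (hsub c hc y hy)
      rw [h1, h2]
      exact hmin c hc y hy
    · simp at hc
      rw [hc] at hy ⊢
      simp at hy
      rw [hy, show ([z] : List String).headI = z from rfl]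

theorem headI_append_left {c : List String} (h : c ≠ []) (d : List String) :
    (c ++ d).headI = c.headI := by
  cases c with
  | nil => exact absurd rfl h
  | cons a t => rfl

theorem good_append_fresh {ns : List String} {R R2 : String → String → Prop}
    {u t : List (List String)} {ci : List String} {z w : String}
    (hg : pvGood ns R (u ++ ci :: t)) (hz : z ∉ ns) (hw : w ∈ ci)
    (hRdom : ∀ x y, R x y → x ≠ y → (x ∈ ns ∧ y ∈ ns))
    (hR2 : ∀ x y, R2 x y ↔ (R x y ∨ (R x w ∧ y = z) ∨ (x = z ∧ R w y) ∨ (x = z ∧ y = z))) :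
    pvGood (ns ++ [z]) R2 (u ++ (ci ++ [z]) :: t) := by
  obtain ⟨hne, hcov, hnd, hcls, hord, hmin⟩ := hg
  have hcim : ci ∈ u ++ ci :: t := List.mem_append.2 (Or.inr (by simp))
  have hcine : ci ≠ [] := hne ci hcim
  have hsub : ∀ c ∈ u ++ ci :: t, ∀ x ∈ c, x ∈ ns := fun c hc x hx => (hcov x).1 ⟨c, hc, hx⟩
  have hwns : w ∈ ns := hsub ci hcim w hw
  have hidx : ∀ y ∈ ns, (ns ++ [z]).idxOf y = ns.idxOf y :=
    fun y hy => List.idxOf_append_of_mem hy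
  have hidxz : (ns ++ [z]).idxOf z = ns.length := idx_head_suf hz
  have hfb : (u ++ ci :: t).flatten = u.flatten ++ (ci ++ t.flatten) := by
    rw [List.flatten_append, List.flatten_cons]
  have hndf : (u.flatten ++ (ci ++ t.flatten)).Nodup := hfb ▸ hnd
  have hside : ∀ c, (c ∈ u ∨ c ∈ t) → ∀ x ∈ c, x ∉ ci := by
    intro c hc x hx hxci
    rcases hc with hc | hc
    · have hxf : x ∈ u.flatten := List.mem_flatten.2 ⟨c, hc, hx⟩
      rcases List.nodup_append.1 hndf with ⟨-, -, hd⟩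
      exact hd x hxf x (List.mem_append.2 (Or.inl hxci)) rfl
    · have hxf : x ∈ t.flatten := List.mem_flatten.2 ⟨c, hc, hx⟩
      rcases List.nodup_append.1 hndf with ⟨-, h2, -⟩
      rcases List.nodup_append.1 h2 with ⟨-, -, hd⟩
      exact hd x hxci x hxf rfl
  have hRnoz : ∀ x y, x ∈ ns → R x y → y ∈ ns := by
    intro x y hx h
    by_cases he : x = y
    · exact he ▸ hx
    · exact (hRdom x y h he).2
  refine ⟨?_, ?_, ?_, ?_, ?_, ?_⟩
  · intro c hc
    rcases List.mem_append.1 hc with hc | hc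
    · exact hne c (List.mem_append.2 (Or.inl hc))
    · rcases List.mem_cons.1 hc with rfl | hc
      · simp
      · exact hne c (List.mem_append.2 (Or.inr (List.mem_cons_of_mem _ hc)))
  · intro x
    constructor
    · rintro ⟨c, hc, hx⟩
      rcases List.mem_append.1 hc with hc | hc
      · exact List.mem_append.2 (Or.inl (hsub c (List.mem_append.2 (Or.inl hc)) x hx))
      · rcases List.mem_cons.1 hc with rfl | hc
        · rcases List.mem_append.1 hx with hx | hx
          · exact List.mem_append.2 (Or.inl (hsub ci hcim x hx))
          · simp at hx; simp [hx]
        · exact List.mem_append.2 (Or.inl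
            (hsub c (List.mem_append.2 (Or.inr (List.mem_cons_of_mem _ hc))) x hx))
    · intro hx
      rcases List.mem_append.1 hx with hx | hx
      · obtain ⟨c, hc, hxc⟩ := (hcov x).2 hx
        rcases List.mem_append.1 hc with hc | hc
        · exact ⟨c, List.mem_append.2 (Or.inl hc), hxc⟩
        · rcases List.mem_cons.1 hc with rfl | hc
          · exact ⟨c ++ [z], List.mem_append.2 (Or.inr (by simp)), List.mem_append.2 (Or.inl hxc)⟩
          · exact ⟨c, List.mem_append.2 (Or.inr (List.mem_cons_of_mem _ hc)), hxc⟩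
      · simp at hx
        exact ⟨ci ++ [z], List.mem_append.2 (Or.inr (by simp)), by simp [hx]⟩
  · have hperm : (u ++ (ci ++ [z]) :: t).flatten.Perm ((u ++ ci :: t).flatten ++ [z]) := by
      rw [hfb, List.flatten_append, List.flatten_cons]
      refine List.perm_iff_count.2 (fun a => ?_)
      simp only [List.count_append]
      omega
    have hzf : z ∉ (u ++ ci :: t).flatten := by
      intro hc
      exact hz ((hcov z).1 (List.mem_flatten.1 hc |>.elim (fun c h => ⟨c, h.1, h.2⟩)))
    refine hperm.symm.nodup ?_
    rw [List.nodup_append]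
    refine ⟨hnd, by simp, ?_⟩
    intro a ha b hb he
    simp at hb
    exact hzf ((he.trans hb) ▸ ha)
  · intro c hc x hx y
    rcases List.mem_append.1 hc with hcu | hc'
    · have hcm : c ∈ u ++ ci :: t := List.mem_append.2 (Or.inl hcu)
      have hxns : x ∈ ns := hsub c hcm x hx
      rw [hcls c hcm x hx y]
      constructor
      · rintro ⟨h1, h2⟩
        exact ⟨List.mem_append.2 (Or.inl h1), (hR2 x y).2 (Or.inl h2)⟩
      · rintro ⟨h1, h2⟩
        rcases (hR2 x y).1 h2 with h2 | ⟨h2, hyz⟩ | ⟨hxz, h2⟩ | ⟨hxz, hyz⟩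
        · exact ⟨hRnoz x y hxns h2, h2⟩
        · exfalso
          have hwc : w ∈ c := (hcls c hcm x hx w).2 ⟨hwns, h2⟩
          exact hside c (Or.inl hcu) w hwc hw
        · exact absurd (show z ∈ ns by rw [← hxz]; exact hxns) hz
        · exact absurd (show z ∈ ns by rw [← hxz]; exact hxns) hz
    · rcases List.mem_cons.1 hc' with rfl | hct
      · rcases List.mem_append.1 hx with hxci | hxz
        · have hxns : x ∈ ns := hsub ci hcim x hxci
          constructor
          · intro hy
            rcases List.mem_append.1 hy with hy | hy
            · obtain ⟨h1, h2⟩ := (hcls ci hcim x hxci y).1 hy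
              exact ⟨List.mem_append.2 (Or.inl h1), (hR2 x y).2 (Or.inl h2)⟩
            · simp at hy
              have hRxw : R x w := ((hcls ci hcim x hxci w).1 hw).2
              exact ⟨by simp [hy], (hR2 x y).2 (Or.inr (Or.inl ⟨hRxw, hy⟩))⟩
          · rintro ⟨h1, h2⟩
            rcases (hR2 x y).1 h2 with h2 | ⟨h2, hyz⟩ | ⟨hxz, h2⟩ | ⟨hxz, hyz⟩
            · exact List.mem_append.2 (Or.inl ((hcls ci hcim x hxci y).2 ⟨hRnoz x y hxns h2, h2⟩))
            · simp [hyz]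
            · exact absurd (show z ∈ ns by rw [← hxz]; exact hxns) hz
            · exact absurd (show z ∈ ns by rw [← hxz]; exact hxns) hz
        · simp at hxz
          rw [hxz]
          constructor
          · intro hy
            rcases List.mem_append.1 hy with hy | hy
            · have hyns : y ∈ ns := hsub ci hcim y hy
              have hRwy : R w y := ((hcls ci hcim w hw y).1 hy).2
              exact ⟨List.mem_append.2 (Or.inl hyns),
                (hR2 z y).2 (Or.inr (Or.inr (Or.inl ⟨rfl, hRwy⟩)))⟩
            · simp at hy
              exact ⟨by simp [hy], (hR2 z y).2 (Or.inr (Or.inr (Or.inr ⟨rfl, hy⟩)))⟩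
          · rintro ⟨h1, h2⟩
            rcases (hR2 z y).1 h2 with h2 | ⟨h2, hyz⟩ | ⟨-, h2⟩ | ⟨-, hyz⟩
            · by_cases hyz : y = z
              · simp [hyz]
              · exact absurd (hRdom z y h2 (fun he => hyz he.symm)).1 hz
            · simp [hyz]
            · by_cases hyw : y = w
              · exact List.mem_append.2 (Or.inl (by rw [hyw]; exact hw))
              · have hyns : y ∈ ns := (hRdom w y h2 (fun he => hyw he.symm)).2
                exact List.mem_append.2 (Or.inl ((hcls ci hcim w hw y).2 ⟨hyns, h2⟩))
            · simp [hyz]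
      · have hcm : c ∈ u ++ ci :: t := List.mem_append.2 (Or.inr (List.mem_cons_of_mem _ hct))
        have hxns : x ∈ ns := hsub c hcm x hx
        rw [hcls c hcm x hx y]
        constructor
        · rintro ⟨h1, h2⟩
          exact ⟨List.mem_append.2 (Or.inl h1), (hR2 x y).2 (Or.inl h2)⟩
        · rintro ⟨h1, h2⟩
          rcases (hR2 x y).1 h2 with h2 | ⟨h2, hyz⟩ | ⟨hxz, h2⟩ | ⟨hxz, hyz⟩
          · exact ⟨hRnoz x y hxns h2, h2⟩
          · exfalso
            have hwc : w ∈ c := (hcls c hcm x hx w).2 ⟨hwns, h2⟩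
            exact hside c (Or.inr hct) w hwc hw
          · exact absurd (show z ∈ ns by rw [← hxz]; exact hxns) hz
          · exact absurd (show z ∈ ns by rw [← hxz]; exact hxns) hz
  · have hmapeq : (u ++ (ci ++ [z]) :: t).map (fun c => (ns ++ [z]).idxOf c.headI)
        = (u ++ ci :: t).map (fun c => ns.idxOf c.headI) := by
      simp only [List.map_append, List.map_cons]
      congr 1
      · refine List.map_congr_left ?_
        intro c hc
        exact hidx _ (hsub c (List.mem_append.2 (Or.inl hc)) _
          (headI_mem (hne c (List.mem_append.2 (Or.inl hc)))))
      · congr 1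
        · rw [headI_append_left hcine]
          exact hidx _ (hsub ci hcim _ (headI_mem hcine))
        · refine List.map_congr_left ?_
          intro c hc
          exact hidx _ (hsub c (List.mem_append.2 (Or.inr (List.mem_cons_of_mem _ hc))) _
            (headI_mem (hne c (List.mem_append.2 (Or.inr (List.mem_cons_of_mem _ hc))))))
    have h1 : ((u ++ ci :: t).map (fun c => ns.idxOf c.headI)).Pairwise (· < ·) :=
      List.pairwise_map.2 hord
    rw [← hmapeq] at h1
    exact List.pairwise_map.1 h1
  · intro c hc y hy
    rcases List.mem_append.1 hc with hc | hc'
    · have hcm : c ∈ u ++ ci :: t := List.mem_append.2 (Or.inl hc)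
      rw [hidx _ (hsub c hcm _ (headI_mem (hne c hcm))), hidx _ (hsub c hcm y hy)]
      exact hmin c hcm y hy
    · rcases List.mem_cons.1 hc' with rfl | hc
      · rw [headI_append_left hcine]
        rw [hidx _ (hsub ci hcim _ (headI_mem hcine))]
        rcases List.mem_append.1 hy with hy | hy
        · rw [hidx _ (hsub ci hcim y hy)]
          exact hmin ci hcim y hy
        · simp at hy
          rw [hy, hidxz]
          have := List.idxOf_lt_length_of_mem (hsub ci hcim _ (headI_mem hcine))
          omega
      · have hcm : c ∈ u ++ ci :: t := List.mem_append.2 (Or.inr (List.mem_cons_of_mem _ hc))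
        rw [hidx _ (hsub c hcm _ (headI_mem (hne c hcm))), hidx _ (hsub c hcm y hy)]
        exact hmin c hcm y hy

theorem good_merge {ns : List String} {R R2 : String → String → Prop}
    {u v w : List (List String)} {cl ch : List String} {p q : String}
    (hg : pvGood ns R (u ++ (cl :: (v ++ (ch :: w))))) (hp : p ∈ cl) (hq : q ∈ ch)
    (hR2 : ∀ x y, R2 x y ↔ (R x y ∨ (R x p ∧ R q y) ∨ (R x q ∧ R p y)))
    (hRsym : ∀ x y, R x y → R y x) (hRtrans : ∀ x y z', R x y → R y z' → R x z') :
    pvGood ns R2 (u ++ ((cl ++ ch) :: (v ++ w))) := by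
  obtain ⟨hne, hcov, hnd, hcls, hord, hmin⟩ := hg
  have hclm : cl ∈ u ++ (cl :: (v ++ (ch :: w))) := List.mem_append.2 (Or.inr (by simp))
  have hchm : ch ∈ u ++ (cl :: (v ++ (ch :: w))) := by
    refine List.mem_append.2 (Or.inr (List.mem_cons_of_mem _ ?_))
    exact List.mem_append.2 (Or.inr (by simp))
  have hclne : cl ≠ [] := hne cl hclm
  have hchne : ch ≠ [] := hne ch hchm
  have hsub : ∀ c ∈ u ++ (cl :: (v ++ (ch :: w))), ∀ x ∈ c, x ∈ ns :=
    fun c hc x hx => (hcov x).1 ⟨c, hc, hx⟩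
  have hmemnew : ∀ c, c ∈ u ++ ((cl ++ ch) :: (v ++ w)) →
      (c ∈ u ∨ c = cl ++ ch ∨ c ∈ v ∨ c ∈ w) := by
    intro c hc
    rcases List.mem_append.1 hc with hc | hc
    · exact Or.inl hc
    · rcases List.mem_cons.1 hc with rfl | hc
      · exact Or.inr (Or.inl rfl)
      · rcases List.mem_append.1 hc with hc | hc
        · exact Or.inr (Or.inr (Or.inl hc))
        · exact Or.inr (Or.inr (Or.inr hc))
  have hmemold : ∀ c, (c ∈ u ∨ c ∈ v ∨ c ∈ w) → c ∈ u ++ (cl :: (v ++ (ch :: w))) := by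
    intro c hc
    rcases hc with hc | hc | hc
    · exact List.mem_append.2 (Or.inl hc)
    · exact List.mem_append.2 (Or.inr (List.mem_cons_of_mem _ (List.mem_append.2 (Or.inl hc))))
    · exact List.mem_append.2 (Or.inr (List.mem_cons_of_mem _
        (List.mem_append.2 (Or.inr (List.mem_cons_of_mem _ hc)))))
  -- positional disjointness via flatten nodup
  have hfb : (u ++ (cl :: (v ++ (ch :: w)))).flatten =
      u.flatten ++ (cl ++ (v.flatten ++ (ch ++ w.flatten))) := by
    simp [List.flatten_append, List.flatten_cons, List.append_assoc]
  have hndf := hfb ▸ hnd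
  have hdisjcl : ∀ c, (c ∈ u ∨ c ∈ v ∨ c ∈ w) → ∀ x ∈ c, x ∉ cl := by
    intro c hc x hx hxcl
    rcases List.nodup_append.1 hndf with ⟨-, h2, hd1⟩
    rcases List.nodup_append.1 h2 with ⟨-, h3, hd2⟩
    rcases List.nodup_append.1 h3 with ⟨-, -, hd3⟩
    rcases hc with hc | hc | hc
    · exact hd1 x (List.mem_flatten.2 ⟨c, hc, hx⟩) x (List.mem_append.2 (Or.inl hxcl)) rfl
    · exact hd2 x hxcl x (List.mem_append.2 (Or.inl (List.mem_flatten.2 ⟨c, hc, hx⟩))) rfl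
    · exact hd2 x hxcl x (List.mem_append.2 (Or.inr
        (List.mem_append.2 (Or.inr (List.mem_flatten.2 ⟨c, hc, hx⟩))))) rfl
  have hdisjch : ∀ c, (c ∈ u ∨ c ∈ v ∨ c ∈ w) → ∀ x ∈ c, x ∉ ch := by
    intro c hc x hx hxch
    rcases List.nodup_append.1 hndf with ⟨-, h2, hd1⟩
    rcases List.nodup_append.1 h2 with ⟨-, h3, hd2⟩
    rcases List.nodup_append.1 h3 with ⟨-, h4, hd3⟩
    rcases List.nodup_append.1 h4 with ⟨-, -, hd4⟩
    rcases hc with hc | hc | hc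
    · exact hd1 x (List.mem_flatten.2 ⟨c, hc, hx⟩) x (List.mem_append.2 (Or.inr
        (List.mem_append.2 (Or.inr (List.mem_append.2 (Or.inl hxch)))))) rfl
    · exact hd3 x (List.mem_flatten.2 ⟨c, hc, hx⟩) x (List.mem_append.2 (Or.inl hxch)) rfl
    · exact hd4 x hxch x (List.mem_flatten.2 ⟨c, hc, hx⟩) rfl
  have hdisjclch : ∀ x ∈ cl, x ∉ ch := by
    intro x hx hxch
    rcases List.nodup_append.1 hndf with ⟨-, h2, -⟩
    rcases List.nodup_append.1 h2 with ⟨-, -, hd2⟩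
    exact hd2 x hx x (List.mem_append.2 (Or.inr (List.mem_append.2 (Or.inl hxch)))) rfl
  refine ⟨?_, ?_, ?_, ?_, ?_, ?_⟩
  · intro c hc
    rcases hmemnew c hc with hc | rfl | hc | hc
    · exact hne c (hmemold c (Or.inl hc))
    · intro he
      exact hclne (List.append_eq_nil_iff.1 he).1
    · exact hne c (hmemold c (Or.inr (Or.inl hc)))
    · exact hne c (hmemold c (Or.inr (Or.inr hc)))
  · intro x
    constructor
    · rintro ⟨c, hc, hx⟩
      rcases hmemnew c hc with hc' | rfl | hc' | hc'
      · exact hsub c (hmemold c (Or.inl hc')) x hx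
      · rcases List.mem_append.1 hx with hx | hx
        · exact hsub cl hclm x hx
        · exact hsub ch hchm x hx
      · exact hsub c (hmemold c (Or.inr (Or.inl hc'))) x hx
      · exact hsub c (hmemold c (Or.inr (Or.inr hc'))) x hx
    · intro hx
      obtain ⟨c, hc, hxc⟩ := (hcov x).2 hx
      rcases List.mem_append.1 hc with hc | hc
      · exact ⟨c, List.mem_append.2 (Or.inl hc), hxc⟩
      · rcases List.mem_cons.1 hc with rfl | hc
        · exact ⟨c ++ ch, List.mem_append.2 (Or.inr (by simp)), List.mem_append.2 (Or.inl hxc)⟩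
        · rcases List.mem_append.1 hc with hc | hc
          · exact ⟨c, List.mem_append.2 (Or.inr (List.mem_cons_of_mem _
              (List.mem_append.2 (Or.inl hc)))), hxc⟩
          · rcases List.mem_cons.1 hc with rfl | hc
            · exact ⟨cl ++ c, List.mem_append.2 (Or.inr (by simp)), List.mem_append.2 (Or.inr hxc)⟩
            · exact ⟨c, List.mem_append.2 (Or.inr (List.mem_cons_of_mem _
                (List.mem_append.2 (Or.inr hc)))), hxc⟩
  · have hperm : (u ++ ((cl ++ ch) :: (v ++ w))).flatten.Perm (u ++ (cl :: (v ++ (ch :: w)))).flatten := by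
      rw [hfb]
      have : (u ++ ((cl ++ ch) :: (v ++ w))).flatten =
          u.flatten ++ ((cl ++ ch) ++ (v.flatten ++ w.flatten)) := by
        simp [List.flatten_append, List.flatten_cons, List.append_assoc]
      rw [this]
      refine List.perm_iff_count.2 (fun a => ?_)
      simp only [List.count_append]
      omega
    exact hperm.symm.nodup hnd
  · intro c hc x hx y
    have hclscl : ∀ x' ∈ cl, ∀ y', y' ∈ cl ↔ (y' ∈ ns ∧ R x' y') := hcls cl hclm
    have hclsch : ∀ x' ∈ ch, ∀ y', y' ∈ ch ↔ (y' ∈ ns ∧ R x' y') := hcls ch hchm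
    rcases hmemnew c hc with hc' | rfl | hc' | hc'
    · -- side components
      have hcm := hmemold c (Or.inl hc')
      have hsidec : ∀ x' ∈ c, x' ∉ cl := hdisjcl c (Or.inl hc') 
      have hsidech : ∀ x' ∈ c, x' ∉ ch := hdisjch c (Or.inl hc')
      rw [hcls c hcm x hx y]
      constructor
      · rintro ⟨h1, h2⟩
        exact ⟨h1, (hR2 x y).2 (Or.inl h2)⟩
      · rintro ⟨h1, h2⟩
        rcases (hR2 x y).1 h2 with h2 | ⟨h2a, h2b⟩ | ⟨h2a, h2b⟩
        · exact ⟨h1, h2⟩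
        · exfalso
          have : p ∈ c := (hcls c hcm x hx p).2 ⟨hsub cl hclm p hp, h2a⟩
          exact hsidec p this hp
        · exfalso
          have : q ∈ c := (hcls c hcm x hx q).2 ⟨hsub ch hchm q hq, h2a⟩
          exact hsidech q this hq
    · -- merged component
      have hkey : ∀ x', x' ∈ cl ++ ch → ∀ y', (y' ∈ cl ++ ch ↔ (y' ∈ ns ∧ R2 x' y')) := by
        intro x' hx' y'
        rcases List.mem_append.1 hx' with hx' | hx'
        · constructor
          · intro hy'
            rcases List.mem_append.1 hy' with hy' | hy'
            · obtain ⟨h1, h2⟩ := (hclscl x' hx' y').1 hy'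
              exact ⟨h1, (hR2 x' y').2 (Or.inl h2)⟩
            · obtain ⟨h1, h2⟩ := (hclsch q hq y').1 hy'
              have hxp : R x' p := ((hclscl x' hx' p).1 hp).2
              exact ⟨h1, (hR2 x' y').2 (Or.inr (Or.inl ⟨hxp, h2⟩))⟩
          · rintro ⟨h1, h2⟩
            rcases (hR2 x' y').1 h2 with h2 | ⟨h2a, h2b⟩ | ⟨h2a, h2b⟩
            · exact List.mem_append.2 (Or.inl ((hclscl x' hx' y').2 ⟨h1, h2⟩))
            · exact List.mem_append.2 (Or.inr ((hclsch q hq y').2 ⟨h1, h2b⟩))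
            · exfalso
              have : q ∈ cl := (hclscl x' hx' q).2 ⟨hsub ch hchm q hq, h2a⟩
              exact hdisjclch q this hq
        · constructor
          · intro hy'
            rcases List.mem_append.1 hy' with hy' | hy'
            · obtain ⟨h1, h2⟩ := (hclscl p hp y').1 hy'
              have hxq : R x' q := ((hclsch x' hx' q).1 hq).2
              exact ⟨h1, (hR2 x' y').2 (Or.inr (Or.inr ⟨hxq, h2⟩))⟩
            · obtain ⟨h1, h2⟩ := (hclsch x' hx' y').1 hy'
              exact ⟨h1, (hR2 x' y').2 (Or.inl h2)⟩
          · rintro ⟨h1, h2⟩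
            rcases (hR2 x' y').1 h2 with h2 | ⟨h2a, h2b⟩ | ⟨h2a, h2b⟩
            · exact List.mem_append.2 (Or.inr ((hclsch x' hx' y').2 ⟨h1, h2⟩))
            · exfalso
              have : p ∈ ch := (hclsch x' hx' p).2 ⟨hsub cl hclm p hp, h2a⟩
              exact hdisjclch p hp this
            · exact List.mem_append.2 (Or.inl ((hclscl p hp y').2 ⟨h1, h2b⟩))
      exact hkey x hx y
    · have hcm := hmemold c (Or.inr (Or.inl hc'))
      have hsidec : ∀ x' ∈ c, x' ∉ cl := hdisjcl c (Or.inr (Or.inl hc'))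
      have hsidech : ∀ x' ∈ c, x' ∉ ch := hdisjch c (Or.inr (Or.inl hc'))
      rw [hcls c hcm x hx y]
      constructor
      · rintro ⟨h1, h2⟩
        exact ⟨h1, (hR2 x y).2 (Or.inl h2)⟩
      · rintro ⟨h1, h2⟩
        rcases (hR2 x y).1 h2 with h2 | ⟨h2a, h2b⟩ | ⟨h2a, h2b⟩
        · exact ⟨h1, h2⟩
        · exfalso
          have : p ∈ c := (hcls c hcm x hx p).2 ⟨hsub cl hclm p hp, h2a⟩
          exact hsidec p this hp
        · exfalso
          have : q ∈ c := (hcls c hcm x hx q).2 ⟨hsub ch hchm q hq, h2a⟩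
          exact hsidech q this hq
    · have hcm := hmemold c (Or.inr (Or.inr hc'))
      have hsidec : ∀ x' ∈ c, x' ∉ cl := hdisjcl c (Or.inr (Or.inr hc'))
      have hsidech : ∀ x' ∈ c, x' ∉ ch := hdisjch c (Or.inr (Or.inr hc'))
      rw [hcls c hcm x hx y]
      constructor
      · rintro ⟨h1, h2⟩
        exact ⟨h1, (hR2 x y).2 (Or.inl h2)⟩
      · rintro ⟨h1, h2⟩
        rcases (hR2 x y).1 h2 with h2 | ⟨h2a, h2b⟩ | ⟨h2a, h2b⟩
        · exact ⟨h1, h2⟩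
        · exfalso
          have : p ∈ c := (hcls c hcm x hx p).2 ⟨hsub cl hclm p hp, h2a⟩
          exact hsidec p this hp
        · exfalso
          have : q ∈ c := (hcls c hcm x hx q).2 ⟨hsub ch hchm q hq, h2a⟩
          exact hsidech q this hq
  · -- pairwise via sublist of the idx-map
    have hmap1 : (u ++ ((cl ++ ch) :: (v ++ w))).map (fun c => ns.idxOf c.headI) =
        u.map (fun c => ns.idxOf c.headI) ++ ns.idxOf cl.headI ::
          (v.map (fun c => ns.idxOf c.headI) ++ w.map (fun c => ns.idxOf c.headI)) := by
      simp [headI_append_left hclne]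
    have hmap2 : (u ++ (cl :: (v ++ (ch :: w)))).map (fun c => ns.idxOf c.headI) =
        u.map (fun c => ns.idxOf c.headI) ++ ns.idxOf cl.headI ::
          (v.map (fun c => ns.idxOf c.headI) ++ ns.idxOf ch.headI ::
            w.map (fun c => ns.idxOf c.headI)) := by
      simp
    have hsubl : ((u ++ ((cl ++ ch) :: (v ++ w))).map (fun c => ns.idxOf c.headI)).Sublist
        ((u ++ (cl :: (v ++ (ch :: w)))).map (fun c => ns.idxOf c.headI)) := by
      rw [hmap1, hmap2]
      refine List.Sublist.append_left ?_ _
      refine List.Sublist.cons₂ _ ?_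
      refine List.Sublist.append_left ?_ _
      exact List.sublist_cons_self _ _
    have h1 := (List.pairwise_map.2 hord).sublist hsubl
    exact List.pairwise_map.1 h1
  · intro c hc y hy
    rcases hmemnew c hc with hc' | rfl | hc' | hc'
    · exact hmin c (hmemold c (Or.inl hc')) y hy
    · rw [headI_append_left hclne]
      rcases List.mem_append.1 hy with hy | hy
      · exact hmin cl hclm y hy
      · have h1 : ns.idxOf cl.headI < ns.idxOf ch.headI := by
          rcases List.pairwise_append.1 hord with ⟨-, h2, -⟩
          rcases List.pairwise_cons.1 h2 with ⟨h3, -⟩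
          exact h3 ch (List.mem_append.2 (Or.inr (by simp)))
        have h2 := hmin ch hchm y hy
        omega
    · exact hmin c (hmemold c (Or.inr (Or.inl hc'))) y hy
    · exact hmin c (hmemold c (Or.inr (Or.inr hc'))) y hy

theorem set_add_of_mem {s : PySem.Set String} {x : String} (h : x ∈ s) :
    PySem.Set.add s x = s := by
  simp only [PySem.Set.add]
  rw [if_pos ((PySem.Set.contains_iff s x).2 h)]

theorem pvR_dom {ps : List (String × String)} {x y : String} (h : pvR ps x y) (hne : x ≠ y) :
    x ∈ pvNodes ps ∧ y ∈ pvNodes ps :=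
  ⟨pvR_mem_right (pvR_symm h) hne, pvR_mem_right h (fun he => hne he.symm)⟩

theorem pvR_fresh_right {ps : List (String × String)} {x b : String} (hb : b ∉ pvNodes ps) :
    pvR ps x b ↔ x = b :=
  ⟨fun h => (pvR_of_not_mem hb (pvR_symm h)).symm ▸ rfl, fun h => h ▸ Relation.ReflTransGen.refl⟩

theorem pvR_fresh_left {ps : List (String × String)} {b y : String} (hb : b ∉ pvNodes ps) :
    pvR ps b y ↔ y = b :=
  ⟨fun h => pvR_of_not_mem hb h, fun h => h ▸ Relation.ReflTransGen.refl⟩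

theorem good_step {ps : List (String × String)} {comps : List (List String)} (a b : String)
    (hg : pvGood (pvNodes ps) (pvR ps) comps) :
    pvGood (pvNodes (ps ++ [(a, b)])) (pvR (ps ++ [(a, b)])) (bccStep comps (a, b)) := by
  have hcov := hg.2.1
  have hRsym : ∀ x y, pvR ps x y → pvR ps y x := fun x y h => pvR_symm h
  have hRtrans : ∀ x y z, pvR ps x y → pvR ps y z → pvR ps x z :=
    fun x y z h1 h2 => h1.trans h2
  have hRdom : ∀ x y, pvR ps x y → x ≠ y → (x ∈ pvNodes ps ∧ y ∈ pvNodes ps) :=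
    fun x y h hne => pvR_dom h hne
  rw [pvNodes_append]
  cases hla : bccLocate comps a with
  | some ia =>
    obtain ⟨hialt, hamem⟩ := locate_some hla
    have hans : a ∈ pvNodes ps := (hcov a).1 ⟨comps[ia], by simp, hamem⟩
    rw [set_add_of_mem hans]
    cases hlb : bccLocate comps b with
    | none =>
      have hbns : b ∉ pvNodes ps := by
        intro hc
        obtain ⟨c, hc1, hc2⟩ := (hcov b).2 hc
        exact locate_none_iff.1 hlb c hc1 hc2
      rw [set_add_of_not_mem hbns]
      have hsimp : bccStep comps (a, b) = comps.set ia ((comps.getD ia []) ++ [b]) := by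
        simp [bccStep, hla, hlb]
      rw [hsimp]
      obtain ⟨hdec, hulen⟩ := decomp_at comps ia hialt
      obtain ⟨u, ci, t, hdec', hulen', hci⟩ :
          ∃ u ci t, comps = u ++ ci :: t ∧ u.length = ia ∧ a ∈ ci :=
        ⟨comps.take ia, comps[ia], comps.drop (ia + 1), hdec, hulen, hamem⟩
      subst hdec'
      rw [← hulen', getD_at_len, set_at_len]
      refine good_append_fresh hg hbns hci hRdom ?_
      intro x y
      rw [pvR_append]
      rw [pvR_fresh_left hbns, pvR_fresh_right hbns]
      constructor
      · rintro (h | ⟨h1, h2⟩ | ⟨h1, h2⟩)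
        · exact Or.inl h
        · exact Or.inr (Or.inl ⟨h1, h2⟩)
        · exact Or.inr (Or.inr (Or.inl ⟨h1, h2⟩))
      · rintro (h | ⟨h1, h2⟩ | ⟨h1, h2⟩ | ⟨h1, h2⟩)
        · exact Or.inl h
        · exact Or.inr (Or.inl ⟨h1, h2⟩)
        · exact Or.inr (Or.inr ⟨h1, h2⟩)
        · exact Or.inl (by rw [h1, h2]; exact Relation.ReflTransGen.refl)
    | some ib =>
      obtain ⟨hiblt, hbmem⟩ := locate_some hlb
      have hbns : b ∈ pvNodes ps := (hcov b).1 ⟨comps[ib], by simp, hbmem⟩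
      rw [set_add_of_mem hbns]
      by_cases hii : ib = ia
      · have hsimp : bccStep comps (a, b) = comps := by
          simp [bccStep, hla, hlb, hii]
        rw [hsimp]
        have hRab : pvR ps a b := by
          subst hii
          exact ((hg.2.2.2.1 comps[ib] (by simp) a hamem b).1 hbmem).2
        refine good_congr ?_ hg
        intro x y
        rw [pvR_append]
        constructor
        · rintro (h | ⟨h1, h2⟩ | ⟨h1, h2⟩)
          · exact h
          · exact (h1.trans hRab).trans h2
          · exact (h1.trans (pvR_symm hRab)).trans h2
        · exact fun h => Or.inl h
      · have hsimp : bccStep comps (a, b) =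
            (comps.set (min ia ib) ((comps.getD (min ia ib) []) ++ (comps.getD (max ia ib) []))).eraseIdx
              (max ia ib) := by
          simp [bccStep, hla, hlb, hii]
        rw [hsimp]
        -- double decomposition at lo < hi
        rcases Nat.lt_or_ge ia ib with hord2 | hord2
        · have hmin : min ia ib = ia := by omega
          have hmax : max ia ib = ib := by omega
          rw [hmin, hmax]
          obtain ⟨u, cl, v, ch, w, hdec, hul, hu2l, hacl, hbch⟩ :
              ∃ u cl v ch w, comps = u ++ (cl :: (v ++ (ch :: w))) ∧ u.length = ia ∧
                (u ++ (cl :: v)).length = ib ∧ a ∈ cl ∧ b ∈ ch := by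
            obtain ⟨hd1, hl1⟩ := decomp_at comps ia hialt
            have hjlt : ib - ia - 1 < (comps.drop (ia + 1)).length := by simp; omega
            obtain ⟨hd2, hl2⟩ := decomp_at (comps.drop (ia + 1)) (ib - ia - 1) hjlt
            have hche : (comps.drop (ia + 1))[ib - ia - 1] = comps[ib] := by
              rw [List.getElem_drop]
              congr 1
              omega
            refine ⟨comps.take ia, comps[ia], (comps.drop (ia + 1)).take (ib - ia - 1),
              comps[ib], (comps.drop (ia + 1)).drop (ib - ia - 1 + 1), ?_, hl1, ?_, hamem, hbmem⟩
            · conv_lhs => rw [hd1]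
              congr 1
              conv_lhs => rw [hd2]
              rw [hche]
            · simp
              omega
          subst hdec
          have hL2 : u ++ (cl :: (v ++ (ch :: w))) = (u ++ (cl :: v)) ++ (ch :: w) := by simp
          have hgdb : (u ++ (cl :: (v ++ (ch :: w)))).getD ib [] = ch := by
            rw [hL2, ← hu2l, getD_at_len]
          rw [← hul, getD_at_len, hgdb, set_at_len]
          have hlen3 : (u ++ ((cl ++ ch) :: v)).length = ib := by simpa using hu2l
          have hL3 : u ++ ((cl ++ ch) :: (v ++ (ch :: w))) = (u ++ ((cl ++ ch) :: v)) ++ (ch :: w) := by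
            simp
          rw [hL3, ← hlen3, erase_at_len]
          have hL4 : (u ++ ((cl ++ ch) :: v)) ++ w = u ++ ((cl ++ ch) :: (v ++ w)) := by simp
          rw [hL4]
          exact good_merge hg hacl hbch (fun x y => pvR_append) hRsym hRtrans
        · have hlt2 : ib < ia := by omega
          have hmin : min ia ib = ib := by omega
          have hmax : max ia ib = ia := by omega
          rw [hmin, hmax]
          obtain ⟨u, cl, v, ch, w, hdec, hul, hu2l, hbcl, hach⟩ :
              ∃ u cl v ch w, comps = u ++ (cl :: (v ++ (ch :: w))) ∧ u.length = ib ∧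
                (u ++ (cl :: v)).length = ia ∧ b ∈ cl ∧ a ∈ ch := by
            obtain ⟨hd1, hl1⟩ := decomp_at comps ib hiblt
            have hjlt : ia - ib - 1 < (comps.drop (ib + 1)).length := by simp; omega
            obtain ⟨hd2, hl2⟩ := decomp_at (comps.drop (ib + 1)) (ia - ib - 1) hjlt
            have hche : (comps.drop (ib + 1))[ia - ib - 1] = comps[ia] := by
              rw [List.getElem_drop]
              congr 1
              omega
            refine ⟨comps.take ib, comps[ib], (comps.drop (ib + 1)).take (ia - ib - 1),
              comps[ia], (comps.drop (ib + 1)).drop (ia - ib - 1 + 1), ?_, hl1, ?_, hbmem, hamem⟩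
            · conv_lhs => rw [hd1]
              congr 1
              conv_lhs => rw [hd2]
              rw [hche]
            · simp
              omega
          subst hdec
          have hL2 : u ++ (cl :: (v ++ (ch :: w))) = (u ++ (cl :: v)) ++ (ch :: w) := by simp
          have hgdb : (u ++ (cl :: (v ++ (ch :: w)))).getD ia [] = ch := by
            rw [hL2, ← hu2l, getD_at_len]
          rw [← hul, getD_at_len, hgdb, set_at_len]
          have hlen3 : (u ++ ((cl ++ ch) :: v)).length = ia := by simpa using hu2l
          have hL3 : u ++ ((cl ++ ch) :: (v ++ (ch :: w))) = (u ++ ((cl ++ ch) :: v)) ++ (ch :: w) := by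
            simp
          rw [hL3, ← hlen3, erase_at_len]
          have hL4 : (u ++ ((cl ++ ch) :: v)) ++ w = u ++ ((cl ++ ch) :: (v ++ w)) := by simp
          rw [hL4]
          refine good_merge hg hbcl hach ?_ hRsym hRtrans
          intro x y
          rw [pvR_append]
          tauto
  | none =>
    have hans : a ∉ pvNodes ps := by
      intro hc
      obtain ⟨c, hc1, hc2⟩ := (hcov a).2 hc
      exact locate_none_iff.1 hla c hc1 hc2
    rw [set_add_of_not_mem hans]
    cases hlb : bccLocate (comps ++ [[a]]) b with
    | none =>
      have hbfresh : ∀ c ∈ comps ++ [[a]], b ∉ c := locate_none_iff.1 hlb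
      have hbns : b ∉ pvNodes ps := by
        intro hc
        obtain ⟨c, hc1, hc2⟩ := (hcov b).2 hc
        exact hbfresh c (List.mem_append.2 (Or.inl hc1)) hc2
      have hba : b ≠ a := by
        intro he
        exact hbfresh [a] (by simp) (by simp [he])
      have hbna : b ∉ pvNodes ps ++ [a] := by
        intro hc
        rcases List.mem_append.1 hc with hc | hc
        · exact hbns hc
        · simp at hc; exact hba hc
      rw [set_add_of_not_mem hbna]
      have hsimp : bccStep comps (a, b) =
          (comps ++ [[a]]).set comps.length (((comps ++ [[a]]).getD comps.length []) ++ [b]) := by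
        simp [bccStep, hla, hlb]
      rw [hsimp]
      have hg1 : (comps ++ [[a]]).getD comps.length [] = [a] := getD_at_len comps [a] []
      have hg2 : (comps ++ [[a]]).set comps.length ([a] ++ [b]) = comps ++ ([a] ++ [b]) :: [] := by
        have := set_at_len comps ([a] : List String) (([a] ++ [b]) : List String) []
        simpa using this
      rw [hg1, hg2]
      have hmid : pvGood (pvNodes ps ++ [a])
          (fun x y => pvR ps x y ∨ (x = a ∧ y = a)) (comps ++ [[a]]) :=
        good_singleton hg hans hRdom (fun x y => Iff.rfl)
      refine good_append_fresh (u := comps) (t := []) (ci := [a]) (z := b) (w := a)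
        hmid hbna (by simp) ?_ ?_
      · rintro x y (h | ⟨rfl, rfl⟩) hne
        · obtain ⟨h1, h2⟩ := hRdom x y h hne
          exact ⟨List.mem_append.2 (Or.inl h1), List.mem_append.2 (Or.inl h2)⟩
        · exact absurd rfl hne
      · intro x y
        constructor
        · intro h
          rcases pvR_append.1 h with h | ⟨h1, h2⟩ | ⟨h1, h2⟩
          · exact Or.inl (Or.inl h)
          · exact Or.inr (Or.inl ⟨Or.inl h1, (pvR_fresh_left hbns).1 h2⟩)
          · exact Or.inr (Or.inr (Or.inl ⟨(pvR_fresh_right hbns).1 h1, Or.inl h2⟩))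
        · intro h
          refine pvR_append.2 ?_
          rcases h with (h | ⟨h1, h2⟩) | ⟨(h1 | ⟨h1, -⟩), h2⟩ | ⟨h1, (h2 | ⟨-, h2⟩)⟩ | ⟨h1, h2⟩
          · exact Or.inl h
          · exact Or.inl (by rw [h1, h2]; exact Relation.ReflTransGen.refl)
          · exact Or.inr (Or.inl ⟨h1, by rw [h2]; exact Relation.ReflTransGen.refl⟩)
          · exact Or.inr (Or.inl ⟨by rw [h1]; exact Relation.ReflTransGen.refl,
              by rw [h2]; exact Relation.ReflTransGen.refl⟩)
          · exact Or.inr (Or.inr ⟨by rw [h1]; exact Relation.ReflTransGen.refl, h2⟩)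
          · exact Or.inr (Or.inr ⟨by rw [h1]; exact Relation.ReflTransGen.refl,
              by rw [h2]; exact Relation.ReflTransGen.refl⟩)
          · exact Or.inl (by rw [h1, h2]; exact Relation.ReflTransGen.refl)
    | some ib =>
      obtain ⟨hiblt, hbmem⟩ := locate_some hlb
      by_cases hii : ib = comps.length
      · have hba : b = a := by
          have : (comps ++ [[a]])[ib] = [a] := by
            subst hii
            simp
          rw [this] at hbmem
          simpa using hbmem
        have hsimp : bccStep comps (a, b) = comps ++ [[a]] := by
          simp [bccStep, hla, hlb, hii]
        rw [hsimp, hba, set_add_of_mem (by simp)]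
        refine good_singleton hg hans hRdom ?_
        intro x y
        constructor
        · intro h
          rcases pvR_append.1 h with h | ⟨h1, h2⟩ | ⟨h1, h2⟩
          · exact Or.inl h
          · exact Or.inr ⟨(pvR_fresh_right hans).1 h1, (pvR_fresh_left hans).1 h2⟩
          · exact Or.inr ⟨(pvR_fresh_right hans).1 h1, (pvR_fresh_left hans).1 h2⟩
        · rintro (h | ⟨h1, h2⟩)
          · exact pvR_append.2 (Or.inl h)
          · exact pvR_append.2 (Or.inr (Or.inl ⟨by rw [h1]; exact Relation.ReflTransGen.refl,
              by rw [h2]; exact Relation.ReflTransGen.refl⟩))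
      · have hiblt2 : ib < comps.length := by
          simp at hiblt
          omega
        have hbmem2 : b ∈ comps[ib] := by
          rwa [List.getElem_append_left hiblt2] at hbmem
        have hbns : b ∈ pvNodes ps := (hcov b).1 ⟨comps[ib], by simp, hbmem2⟩
        have hba : b ≠ a := fun he => hans (he ▸ hbns)
        have hbmem3 : b ∈ pvNodes ps ++ [a] := List.mem_append.2 (Or.inl hbns)
        rw [set_add_of_mem hbmem3]
        have hmin : min comps.length ib = ib := by omega
        have hmax : max comps.length ib = comps.length := by omega
        have hsimp : bccStep comps (a, b) =
            ((comps ++ [[a]]).set ib (((comps ++ [[a]]).getD ib []) ++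
              ((comps ++ [[a]]).getD comps.length []))).eraseIdx comps.length := by
          simp only [bccStep, hla, hlb]
          rw [if_neg hii, hmin, hmax]
        rw [hsimp]
        obtain ⟨u, ci, t, hdec, hulen, hci⟩ :
            ∃ u ci t, comps = u ++ ci :: t ∧ u.length = ib ∧ b ∈ ci :=
          ⟨comps.take ib, comps[ib], comps.drop (ib + 1), (decomp_at comps ib hiblt2).1,
            (decomp_at comps ib hiblt2).2, hbmem2⟩
        subst hdec
        have hap : (u ++ ci :: t) ++ [[a]] = u ++ ci :: (t ++ [[a]]) := by simp
        have hgdb : ((u ++ ci :: t) ++ [[a]]).getD ib [] = ci := by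
          rw [hap, ← hulen, getD_at_len]
        have hgda : ((u ++ ci :: t) ++ [[a]]).getD (u ++ ci :: t).length [] = [a] :=
          getD_at_len (u ++ ci :: t) [a] []
        rw [hgdb, hgda]
        have hset : ((u ++ ci :: t) ++ [[a]]).set ib (ci ++ [a]) =
            (u ++ (ci ++ [a]) :: t) ++ [[a]] := by
          rw [hap, ← hulen, set_at_len]
          simp
        rw [hset]
        have herase : ((u ++ (ci ++ [a]) :: t) ++ [[a]]).eraseIdx (u ++ ci :: t).length =
            u ++ (ci ++ [a]) :: t := by
          have hl : (u ++ ci :: t).length = (u ++ (ci ++ [a]) :: t).length := by simp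
          rw [hl]
          have := erase_at_len (u ++ (ci ++ [a]) :: t) ([a] : List String) []
          simpa using this
        rw [herase]
        refine good_append_fresh hg hans hci hRdom ?_
        intro x y
        rw [pvR_append]
        rw [pvR_fresh_left hans, pvR_fresh_right hans]
        constructor
        · rintro (h | ⟨h1, h2⟩ | ⟨h1, h2⟩)
          · exact Or.inl h
          · exact Or.inr (Or.inr (Or.inl ⟨h1, h2⟩))
          · exact Or.inr (Or.inl ⟨h1, h2⟩)
        · rintro (h | ⟨h1, h2⟩ | ⟨h1, h2⟩ | ⟨h1, h2⟩)
          · exact Or.inl h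
          · exact Or.inr (Or.inr ⟨h1, h2⟩)
          · exact Or.inr (Or.inl ⟨h1, h2⟩)
          · exact Or.inl (by rw [h1, h2]; exact Relation.ReflTransGen.refl)

theorem B_good (cps : List (String × String)) :
    pvGood (pvNodes cps) (pvR cps) (cps.foldl bccStep []) := by
  induction cps using List.reverseRecOn with
  | nil =>
    refine ⟨by simp, by simp [pvNodes], by simp, by simp, by simp, by simp⟩
  | append_singleton ps p ih =>
    rw [List.foldl_append]
    obtain ⟨a, b⟩ := p
    exact good_step a b ih

theorem B_canon (cps : List (String × String)) :
    pvIsCanon (pvNodes cps) (pvR cps) (build_conflict_components_py_alt cps) :=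
  good_canon (fun _ _ h => pvR_symm h) (B_good cps)

theorem AB_eq (cps : List (String × String)) :
    build_conflict_components_py cps = build_conflict_components_py_alt cps :=
  pvIsCanon_unique (A_canon cps) (B_canon cps)


-- ===== VERDICT (by name: the statement is the Claim_ definition above) =====
theorem build_conflict_components_py_spec : Claim_equal_build_conflict_components_py := by
  intro conflict_pairs _hdom
  unfold Spec_build_conflict_components_py
  exact AB_eq conflict_pairs
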